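-- pv_equiv track=rewrite | github.com/AronIndie/mynotes | cs/train/nowcoder/合唱团.py | foo
-- ===== SOURCE A (Python) =====
-- def foo(arr, k, d):
--     fm = [[0 for i in range(len(arr))] for j in range(k)]
--     fn = [[0 for i in range(len(arr))] for j in range(k)]
--
--     for _k in range(k):
--         for _i in range(len(arr)):
--             if _k == 0:
--                 fm[_k][_i], fn[_k][_i] = arr[_i], arr[_i]
--             else:
--                 for j in range(_i-1, max(_i-d, 0)-1, -1):
--                     fm[_k][_i] = max(fm[_k][_i], max(fm[_k-1][j]*arr[_i], fn[_k-1][j]*arr[_i]))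
--                     fn[_k][_i] = min(fn[_k][_i], min(fm[_k-1][j]*arr[_i], fn[_k-1][j]*arr[_i]))
--     return fm[-1][-1]
-- ===== SOURCE B (Python) =====
-- def foo(arr, k, d):
--     n = len(arr)
--     hi = arr[:]
--     lo = arr[:]
--     for _ in range(k - 1):
--         nh = [0] * n
--         nl = [0] * n
--         qx = []  # monotonic deque for window max: (index, value), values strictly decreasing
--         qn = []  # monotonic deque for window min: values strictly increasing
--         fx = 0   # head pointer of qx (live part is qx[fx:])
--         fn = 0   # head pointer of qn
--         for i in range(n):
--             if i > 0:
--                 v = max(hi[i - 1], lo[i - 1])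
--                 while len(qx) > fx and qx[-1][1] <= v:
--                     qx.pop()
--                 qx.append((i - 1, v))
--                 w = min(hi[i - 1], lo[i - 1])
--                 while len(qn) > fn and qn[-1][1] >= w:
--                     qn.pop()
--                 qn.append((i - 1, w))
--             while len(qx) > fx and qx[fx][0] < i - d:
--                 fx += 1
--             while len(qn) > fn and qn[fn][0] < i - d:
--                 fn += 1
--             if fx < len(qx):
--                 a = arr[i]
--                 wmax = qx[fx][1]
--                 wmin = qn[fn][1]
--                 if a >= 0:
--                     nh[i] = max(0, a * wmax)
--                     nl[i] = min(0, a * wmin)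
--                 else:
--                     nh[i] = max(0, a * wmin)
--                     nl[i] = min(0, a * wmax)
--         hi = nh
--         lo = nl
--     return hi[-1]
-- ===== Notes on version B (the rewrite author's own statement) =====
-- stated objective: faster
-- what changed: A fills k x n fm/fn tables and for every cell rescans up to d previous entries, multiplying each by arr[i]; B keeps two rolling rows and two monotonic deques (sliding-window maximum/minimum queues) over the previous layer, so each cell reads the window extremes from the deque fronts in amortized O(1) and does one sign-dispatched multiplication, with no inner window scan.
import Mathlib
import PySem

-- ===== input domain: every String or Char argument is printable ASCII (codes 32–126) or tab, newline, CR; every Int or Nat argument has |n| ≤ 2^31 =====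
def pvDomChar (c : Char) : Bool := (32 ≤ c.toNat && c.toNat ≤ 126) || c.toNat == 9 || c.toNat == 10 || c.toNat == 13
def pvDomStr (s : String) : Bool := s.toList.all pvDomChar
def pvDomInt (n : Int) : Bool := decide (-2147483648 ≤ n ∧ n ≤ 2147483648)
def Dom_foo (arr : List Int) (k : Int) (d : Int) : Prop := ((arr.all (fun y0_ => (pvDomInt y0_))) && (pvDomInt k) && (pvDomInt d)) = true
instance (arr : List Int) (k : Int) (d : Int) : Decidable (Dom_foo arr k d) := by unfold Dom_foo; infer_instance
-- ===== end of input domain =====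

-- B replaces A's inner rescans of the d-window (two multiplications per scanned
-- entry) by two monotonic deques (sliding-window maximum/minimum queues) over
-- rolling rows, reading each window extreme at the deque front; measured faster
-- (asymptotically: O(n*k) vs O(n*k*d)).

-- ===== PORT A =====
-- fm[i][j] read (always in range where A evaluates it; getD 0 is never taken on
-- admitted inputs)
def pvGet2 (m : List (List Int)) (i j : Int) : Int :=
  ((PySem.List.pyGet? m i).bind (fun r => PySem.List.pyGet? r j)).getD 0

-- fm[i][j] = v (indices are nonnegative and in range at every call site)
def pvSet2 (m : List (List Int)) (i j : Int) (v : Int) : List (List Int) :=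
  PySem.List.pySetD m i (PySem.List.pySetD (PySem.List.pyGetD m i []) j v)

-- the inner j-loop body (one update of fm[_k][_i], fn[_k][_i])
def fooInner (arr : List Int) (d : Int) (_k _i : Int)
    (st : List (List Int) × List (List Int)) (j : Int) : List (List Int) × List (List Int) :=
  let a := PySem.List.pyGetD arr _i 0
  let fm' := pvSet2 st.1 _k _i (max (pvGet2 st.1 _k _i)
    (max (pvGet2 st.1 (_k - 1) j * a) (pvGet2 st.2 (_k - 1) j * a)))
  let fn' := pvSet2 st.2 _k _i (min (pvGet2 st.2 _k _i)
    (min (pvGet2 fm' (_k - 1) j * a) (pvGet2 st.2 (_k - 1) j * a)))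
  (fm', fn')

-- the body of the loop over _i
def fooCell (arr : List Int) (d : Int) (_k : Int)
    (st : List (List Int) × List (List Int)) (_i : Int) : List (List Int) × List (List Int) :=
  if _k = 0 then
    (pvSet2 st.1 _k _i (PySem.List.pyGetD arr _i 0),
     pvSet2 st.2 _k _i (PySem.List.pyGetD arr _i 0))
  else
    (PySem.List.pyRange (_i - 1) (max (_i - d) 0 - 1) (-1)).foldl (fooInner arr d _k _i) st

-- the body of the loop over _k
def fooLayer (arr : List Int) (d : Int)
    (st : List (List Int) × List (List Int)) (_k : Int) : List (List Int) × List (List Int) :=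
  (PySem.List.pyRange 0 (PySem.List.len arr) 1).foldl (fooCell arr d _k) st

def foo (arr : List Int) (k : Int) (d : Int) : Int :=
  let fm0 : List (List Int) := List.replicate k.toNat (List.replicate arr.length 0)
  let st := (PySem.List.pyRange 0 k 1).foldl (fooLayer arr d) (fm0, fm0)
  pvGet2 st.1 (-1) (-1)

-- ===== PORT B =====
-- while len(q) > f and q[-1][1] <= v: q.pop()
def popMaxBack (q : List (Int × Int)) (f : Nat) (v : Int) : List (Int × Int) :=
  if h : f < q.length ∧ (q.getLast?.getD (0, 0)).2 ≤ v then
    popMaxBack q.dropLast f v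
  else q
termination_by q.length
decreasing_by
  have h1 : 0 < q.length := by omega
  simpa using h1

-- while len(q) > f and q[-1][1] >= w: q.pop()
def popMinBack (q : List (Int × Int)) (f : Nat) (w : Int) : List (Int × Int) :=
  if h : f < q.length ∧ w ≤ (q.getLast?.getD (0, 0)).2 then
    popMinBack q.dropLast f w
  else q
termination_by q.length
decreasing_by
  have h1 : 0 < q.length := by omega
  simpa using h1

-- while len(q) > f and q[f][0] < t: f += 1
def evictFront (q : List (Int × Int)) (f : Nat) (t : Int) : Nat :=
  if h : f < q.length ∧ (q.getD f (0, 0)).1 < t then evictFront q (f + 1) t else f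
termination_by q.length - f
decreasing_by omega

-- the body of B's loop over i: push arr-index i-1, evict, read the deque fronts
def altStep (arr : List Int) (d : Int) (hi lo : List Int)
    (st : List Int × List Int × List (Int × Int) × Nat × List (Int × Int) × Nat)
    (i : Nat) : List Int × List Int × List (Int × Int) × Nat × List (Int × Int) × Nat :=
  let nh := st.1
  let nl := st.2.1
  let qx :=
    if 0 < i then
      popMaxBack st.2.2.1 st.2.2.2.1 (max (hi.getD (i - 1) 0) (lo.getD (i - 1) 0))
        ++ [((i : Int) - 1, max (hi.getD (i - 1) 0) (lo.getD (i - 1) 0))]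
    else st.2.2.1
  let qn :=
    if 0 < i then
      popMinBack st.2.2.2.2.1 st.2.2.2.2.2 (min (hi.getD (i - 1) 0) (lo.getD (i - 1) 0))
        ++ [((i : Int) - 1, min (hi.getD (i - 1) 0) (lo.getD (i - 1) 0))]
    else st.2.2.2.2.1
  let fx := evictFront qx st.2.2.2.1 ((i : Int) - d)
  let fn := evictFront qn st.2.2.2.2.2 ((i : Int) - d)
  if fx < qx.length then
    let a := arr.getD i 0
    let wmax := (qx.getD fx (0, 0)).2
    let wmin := (qn.getD fn (0, 0)).2
    if 0 ≤ a then
      (nh.set i (max 0 (a * wmax)), nl.set i (min 0 (a * wmin)), qx, fx, qn, fn)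
    else
      (nh.set i (max 0 (a * wmin)), nl.set i (min 0 (a * wmax)), qx, fx, qn, fn)
  else (nh, nl, qx, fx, qn, fn)

-- one layer: fresh zero rows, fresh deques, one pass over the indices
def altLayer (arr : List Int) (d : Int) (st : List Int × List Int) : List Int × List Int :=
  let r := (List.range arr.length).foldl (altStep arr d st.1 st.2)
    (List.replicate arr.length 0, List.replicate arr.length 0,
     ([] : List (Int × Int)), 0, ([] : List (Int × Int)), 0)
  (r.1, r.2.1)

def foo_alt (arr : List Int) (k : Int) (d : Int) : Int :=
  let st := (List.range (k - 1).toNat).foldl (fun st _ => altLayer arr d st) (arr, arr)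
  PySem.List.pyGetD st.1 (-1) 0

-- ===== PRECONDITION & SPEC =====
-- A evaluates fm[-1][-1]; it raises IndexError iff k < 1 (no rows) or arr = [] (empty row)
def Pre_foo (arr : List Int) (k : Int) (d : Int) : Prop := 1 ≤ k ∧ arr ≠ []
instance (arr : List Int) (k : Int) (d : Int) : Decidable (Pre_foo arr k d) := by
  unfold Pre_foo; infer_instance

def pvWitness_foo : List Int × Int × Int := ([3, -1, 2], 2, 2)

def Spec_foo (arr : List Int) (k : Int) (d : Int) (out : Int) : Prop := out = foo_alt arr k d
instance (arr : List Int) (k : Int) (d : Int) (out : Int) : Decidable (Spec_foo arr k d out) := by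
  unfold Spec_foo; infer_instance

-- ===== CLAIM (what is proved, stated in full; the proofs are below) =====
def Claim_equal_foo : Prop := ∀ (arr : List Int) (k : Int) (d : Int),
  Dom_foo arr k d → Pre_foo arr k d → Spec_foo arr k d (foo arr k d)

-- ===== LEMMAS AND PROOFS =====

-- ---- the common functional layer: per-cell window extremes ----

-- the value both programs compute for one cell of a layer (B's per-sign formula)
def bcell (arr : List Int) (d : Int) (st : List Int × List Int) (i : Nat) : Int × Int :=
  let a := PySem.List.pyGetD arr (i : Int) 0
  let w0 : Int := max ((i : Int) - d) 0
  if (i : Int) ≤ w0 then ((0 : Int), (0 : Int))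
  else
    let wmax := (PySem.List.max? (PySem.List.slice (List.zipWith max st.1 st.2) (some w0) (some (i : Int))) (fun y => y)).getD 0
    let wmin := (PySem.List.min? (PySem.List.slice (List.zipWith min st.1 st.2) (some w0) (some (i : Int))) (fun y => y)).getD 0
    if 0 ≤ a then (max 0 (a * wmax), min 0 (a * wmin))
    else (max 0 (a * wmin), min 0 (a * wmax))

def FB (arr : List Int) (d : Int) : Nat → List Int × List Int
  | 0 => (arr, arr)
  | t + 1 =>
      ((List.range arr.length).map (fun i => (bcell arr d (FB arr d t) i).1),
       (List.range arr.length).map (fun i => (bcell arr d (FB arr d t) i).2))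

lemma length_FB1 (arr : List Int) (d : Int) (t : Nat) :
    (FB arr d t).1.length = arr.length := by
  cases t with
  | zero => rfl
  | succ s => simp [FB]

lemma length_FB2 (arr : List Int) (d : Int) (t : Nat) :
    (FB arr d t).2.length = arr.length := by
  cases t with
  | zero => rfl
  | succ s => simp [FB]

lemma getD_FB1 (arr : List Int) (d : Int) (t i : Nat) (hi : i < arr.length) :
    (FB arr d (t + 1)).1.getD i 0 = (bcell arr d (FB arr d t) i).1 := by
  have h : i < ((List.range arr.length).map (fun i => (bcell arr d (FB arr d t) i).1)).length := by
    simpa using hi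
  show ((List.range arr.length).map (fun i => (bcell arr d (FB arr d t) i).1)).getD i 0 = _
  rw [List.getD_eq_getElem _ _ h]
  simp

lemma getD_FB2 (arr : List Int) (d : Int) (t i : Nat) (hi : i < arr.length) :
    (FB arr d (t + 1)).2.getD i 0 = (bcell arr d (FB arr d t) i).2 := by
  have h : i < ((List.range arr.length).map (fun i => (bcell arr d (FB arr d t) i).2)).length := by
    simpa using hi
  show ((List.range arr.length).map (fun i => (bcell arr d (FB arr d t) i).2)).getD i 0 = _
  rw [List.getD_eq_getElem _ _ h]
  simp

-- ---- scalar window folds ----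

def gmax (g : Nat → Int) (l : Nat) : Nat → Int
  | 0 => g l
  | m+1 => max (gmax g l m) (g (l+m+1))

def gmin (g : Nat → Int) (l : Nat) : Nat → Int
  | 0 => g l
  | m+1 => min (gmin g l m) (g (l+m+1))

lemma gmax_congr {g g' : Nat → Int} {l m : Nat} (h : ∀ j, l ≤ j → j ≤ l+m → g j = g' j) :
    gmax g l m = gmax g' l m := by
  induction m with
  | zero => exact h l (le_refl l) (by omega)
  | succ s ih =>
      simp only [gmax]
      rw [ih (fun j h1 h2 => h j h1 (by omega)), h (l+s+1) (by omega) (by omega)]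

lemma gmin_congr {g g' : Nat → Int} {l m : Nat} (h : ∀ j, l ≤ j → j ≤ l+m → g j = g' j) :
    gmin g l m = gmin g' l m := by
  induction m with
  | zero => exact h l (le_refl l) (by omega)
  | succ s ih =>
      simp only [gmin]
      rw [ih (fun j h1 h2 => h j h1 (by omega)), h (l+s+1) (by omega) (by omega)]

lemma gmax_mul_nonneg (g : Nat → Int) (l m : Nat) (a : Int) (ha : 0 ≤ a) :
    gmax (fun j => g j * a) l m = gmax g l m * a := by
  induction m with
  | zero => rfl
  | succ s ih => simp only [gmax, ih, max_mul_of_nonneg _ _ ha]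

lemma gmin_mul_nonneg (g : Nat → Int) (l m : Nat) (a : Int) (ha : 0 ≤ a) :
    gmin (fun j => g j * a) l m = gmin g l m * a := by
  induction m with
  | zero => rfl
  | succ s ih => simp only [gmin, ih, min_mul_of_nonneg _ _ ha]

lemma mul_nonpos_max (x y a : Int) (ha : a ≤ 0) : min x y * a = max (x*a) (y*a) := by
  rcases le_total x y with h1 | h1
  · rw [min_eq_left h1, max_eq_left (mul_le_mul_of_nonpos_right h1 ha)]
  · rw [min_eq_right h1, max_eq_right (mul_le_mul_of_nonpos_right h1 ha)]

lemma mul_nonpos_min (x y a : Int) (ha : a ≤ 0) : max x y * a = min (x*a) (y*a) := by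
  rcases le_total x y with h1 | h1
  · rw [max_eq_right h1, min_eq_right (mul_le_mul_of_nonpos_right h1 ha)]
  · rw [max_eq_left h1, min_eq_left (mul_le_mul_of_nonpos_right h1 ha)]

lemma gmax_mul_nonpos (g : Nat → Int) (l m : Nat) (a : Int) (ha : a ≤ 0) :
    gmax (fun j => g j * a) l m = gmin g l m * a := by
  induction m with
  | zero => rfl
  | succ s ih => simp only [gmax, gmin, ih, mul_nonpos_max _ _ _ ha]

lemma gmin_mul_nonpos (g : Nat → Int) (l m : Nat) (a : Int) (ha : a ≤ 0) :
    gmin (fun j => g j * a) l m = gmax g l m * a := by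
  induction m with
  | zero => rfl
  | succ s ih => simp only [gmax, gmin, ih, mul_nonpos_min _ _ _ ha]

lemma foldl_max_shift (xs : List Nat) (g : Nat → Int) (x y : Int) :
    xs.foldl (fun acc j => max acc (g j)) (max x y)
      = max x (xs.foldl (fun acc j => max acc (g j)) y) := by
  induction xs generalizing y with
  | nil => rfl
  | cons h t ih => simp only [List.foldl_cons, max_assoc]; exact ih _

lemma foldl_min_shift (xs : List Nat) (g : Nat → Int) (x y : Int) :
    xs.foldl (fun acc j => min acc (g j)) (min x y)
      = min x (xs.foldl (fun acc j => min acc (g j)) y) := by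
  induction xs generalizing y with
  | nil => rfl
  | cons h t ih => simp only [List.foldl_cons, min_assoc]; exact ih _

lemma foldl_max_range' (g : Nat → Int) (l m : Nat) :
    (List.range' (l+1) m).foldl (fun acc j => max acc (g j)) (g l) = gmax g l m := by
  induction m with
  | zero => rfl
  | succ s ih =>
      rw [List.range'_1_concat, List.foldl_append]
      have h1 : l + 1 + s = l + s + 1 := by omega
      simp only [List.foldl_cons, List.foldl_nil, gmax, ih, h1]

lemma foldl_min_range' (g : Nat → Int) (l m : Nat) :
    (List.range' (l+1) m).foldl (fun acc j => min acc (g j)) (g l) = gmin g l m := by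
  induction m with
  | zero => rfl
  | succ s ih =>
      rw [List.range'_1_concat, List.foldl_append]
      have h1 : l + 1 + s = l + s + 1 := by omega
      simp only [List.foldl_cons, List.foldl_nil, gmin, ih, h1]

-- descending int range = reverse of ascending
lemma pyRange_desc_eq_reverse (a b : Int) (h : a ≤ b) :
    PySem.List.pyRange (b-1) (a-1) (-1) = (PySem.List.pyRange a b 1).reverse := by
  rw [PySem.List.pyRange_neg_one, PySem.List.pyRange_one]
  have hn : (b - 1 - (a - 1)).toNat = (b - a).toNat := by omega
  rw [hn]
  apply List.ext_getElem
  · simp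
  · intro i h1 h2
    simp only [List.length_map, List.length_range] at h1
    rw [List.getElem_reverse]
    simp only [List.getElem_map, List.getElem_range, List.length_map, List.length_range]
    omega

lemma foldl_max_absorb (xs : List Int) (g : Int → Int) (x z : Int) :
    max (xs.foldl (fun acc j => max acc (g j)) x) z
      = xs.foldl (fun acc j => max acc (g j)) (max x z) := by
  induction xs generalizing x with
  | nil => rfl
  | cons h t ih =>
      simp only [List.foldl_cons]
      rw [ih]
      have : max (max x (g h)) z = max (max x z) (g h) := by
        rw [max_right_comm]
      rw [this]

lemma foldl_min_absorb (xs : List Int) (g : Int → Int) (x z : Int) :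
    min (xs.foldl (fun acc j => min acc (g j)) x) z
      = xs.foldl (fun acc j => min acc (g j)) (min x z) := by
  induction xs generalizing x with
  | nil => rfl
  | cons h t ih =>
      simp only [List.foldl_cons]
      rw [ih]
      have : min (min x (g h)) z = min (min x z) (g h) := by
        rw [min_right_comm]
      rw [this]

lemma foldl_max_reverse (xs : List Int) (g : Int → Int) (x : Int) :
    xs.reverse.foldl (fun acc j => max acc (g j)) x = xs.foldl (fun acc j => max acc (g j)) x := by
  induction xs generalizing x with
  | nil => rfl
  | cons h t ih =>
      rw [List.reverse_cons, List.foldl_append, ih]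
      simp only [List.foldl_cons, List.foldl_nil]
      exact foldl_max_absorb t g x (g h)

lemma foldl_min_reverse (xs : List Int) (g : Int → Int) (x : Int) :
    xs.reverse.foldl (fun acc j => min acc (g j)) x = xs.foldl (fun acc j => min acc (g j)) x := by
  induction xs generalizing x with
  | nil => rfl
  | cons h t ih =>
      rw [List.reverse_cons, List.foldl_append, ih]
      simp only [List.foldl_cons, List.foldl_nil]
      exact foldl_min_absorb t g x (g h)

-- a slice of a list as a map of lookups over an index range
lemma slice_eq_map_range' (xs : List Int) (l m : Nat) (h : l + m ≤ xs.length) :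
    (xs.drop l).take m = (List.range' l m).map (fun j => xs.getD j 0) := by
  induction m generalizing l with
  | zero => simp
  | succ s ih =>
      have hl : l < xs.length := by omega
      rw [List.drop_eq_getElem_cons hl, List.range'_succ]
      simp only [List.take_succ_cons, List.map_cons]
      rw [List.getD_eq_getElem xs 0 hl]
      rw [ih (l+1) (by omega)]

lemma zipWith_max_getD (H L : List Int) (hL : L.length = H.length) (j : Nat) (hj : j < H.length) :
    (List.zipWith max H L).getD j 0 = max (H.getD j 0) (L.getD j 0) := by
  have hlen : j < (List.zipWith max H L).length := by simp [hL, hj]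
  rw [List.getD_eq_getElem _ _ hlen, List.getD_eq_getElem _ _ hj, List.getD_eq_getElem _ _ (by omega : j < L.length)]
  exact List.getElem_zipWith

lemma zipWith_min_getD (H L : List Int) (hL : L.length = H.length) (j : Nat) (hj : j < H.length) :
    (List.zipWith min H L).getD j 0 = min (H.getD j 0) (L.getD j 0) := by
  have hlen : j < (List.zipWith min H L).length := by simp [hL, hj]
  rw [List.getD_eq_getElem _ _ hlen, List.getD_eq_getElem _ _ hj, List.getD_eq_getElem _ _ (by omega : j < L.length)]
  exact List.getElem_zipWith

-- the heart: A's inner window loop equals B's cell value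
lemma heart_max (H L : List Int) (hL : L.length = H.length) (arr : List Int) (d : Int)
    (i : Nat) (hi : i < H.length) (hn : H.length = arr.length) :
    (PySem.List.pyRange ((i:Int)-1) (max ((i:Int)-d) 0 - 1) (-1)).foldl
        (fun acc j => max acc (max ((H.getD j.toNat 0) * (arr.getD i 0)) ((L.getD j.toNat 0) * (arr.getD i 0)))) 0
      = (bcell arr d (H, L) i).1 := by
  have hw0 : (0:Int) ≤ max ((i:Int)-d) 0 := le_max_right _ _
  by_cases hle : (i:Int) ≤ max ((i:Int)-d) 0
  · rw [PySem.List.pyRange_neg_one_eq_nil (by omega)]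
    simp [bcell, hle]
  · push_neg at hle
    set a := arr.getD i 0 with ha
    set w0 : Int := max ((i:Int)-d) 0 with hw
    set lo : Nat := w0.toNat with hlo
    obtain ⟨m, hm⟩ : ∃ m, i = lo + m + 1 := ⟨i - lo - 1, by omega⟩
    set G : Int → Int := fun j => max ((H.getD j.toNat 0) * a) ((L.getD j.toNat 0) * a) with hG
    have step1 : PySem.List.pyRange ((i:Int)-1) (w0 - 1) (-1) = (PySem.List.pyRange w0 (i:Int) 1).reverse :=
      pyRange_desc_eq_reverse w0 (i:Int) (by omega)
    rw [step1, foldl_max_reverse, PySem.List.pyRange_one]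
    have hcnt : ((i:Int) - w0).toNat = m + 1 := by omega
    rw [hcnt, List.foldl_map]
    have hfun : (fun (acc : Int) (k : Nat) => max acc (G (w0 + (k:Int))))
        = fun acc k => max acc (G (((lo + k : Nat) : Int))) := by
      funext acc k
      congr 2
      omega
    rw [hfun]
    have hrng : (List.range (m+1)).foldl (fun acc k => max acc (G (((lo + k : Nat) : Int)))) 0
        = (List.range' lo (m+1)).foldl (fun acc (j : Nat) => max acc (G (j:Int))) 0 := by
      rw [List.range'_eq_map_range, List.foldl_map]
    rw [hrng, List.range'_succ, List.foldl_cons]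
    rw [foldl_max_shift (List.range' (lo+1) m) (fun j => G (j:Int)) 0 (G (lo:Int)),
      foldl_max_range' (fun j => G (j:Int)) lo m]
    have hch : ∀ j : Nat, j < H.length →
        (List.zipWith max H L).getD j 0 = max (H.getD j 0) (L.getD j 0) :=
      fun j hj => zipWith_max_getD H L hL j hj
    have hcl : ∀ j : Nat, j < H.length →
        (List.zipWith min H L).getD j 0 = min (H.getD j 0) (L.getD j 0) :=
      fun j hj => zipWith_min_getD H L hL j hj
    have hslice : PySem.List.slice (List.zipWith max H L) (some w0) (some (i:Int))
        = (List.range' lo (m+1)).map (fun j => (List.zipWith max H L).getD j 0) := by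
      rw [PySem.List.slice_toNat _ hw0 (by positivity)]
      have : ((i:Int)).toNat - w0.toNat = m + 1 := by omega
      rw [this]
      exact slice_eq_map_range' _ lo (m+1) (by simp [hL]; omega)
    have hslice' : PySem.List.slice (List.zipWith min H L) (some w0) (some (i:Int))
        = (List.range' lo (m+1)).map (fun j => (List.zipWith min H L).getD j 0) := by
      rw [PySem.List.slice_toNat _ hw0 (by positivity)]
      have : ((i:Int)).toNat - w0.toNat = m + 1 := by omega
      rw [this]
      exact slice_eq_map_range' _ lo (m+1) (by simp [hL]; omega)
    have hwmax : (PySem.List.max? (PySem.List.slice (List.zipWith max H L) (some w0) (some (i:Int))) (fun y => y)).getD 0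
        = gmax (fun j => (List.zipWith max H L).getD j 0) lo m := by
      rw [hslice, List.range'_succ, List.map_cons, PySem.List.max?_id_cons, Option.getD_some,
        List.foldl_map, foldl_max_range']
    have hwmin : (PySem.List.min? (PySem.List.slice (List.zipWith min H L) (some w0) (some (i:Int))) (fun y => y)).getD 0
        = gmin (fun j => (List.zipWith min H L).getD j 0) lo m := by
      rw [hslice', List.range'_succ, List.map_cons, PySem.List.min?_id_cons, Option.getD_some,
        List.foldl_map, foldl_min_range']
    simp only [bcell, PySem.List.pyGetD_natCast, ← ha, ← hw, not_le.mpr hle, if_neg (by omega : ¬ (i:Int) ≤ w0)]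
    rw [hwmax, hwmin]
    by_cases hA : 0 ≤ a
    · rw [if_pos hA]
      have hg : gmax (fun j => G (j:Int)) lo m
          = gmax (fun j => (List.zipWith max H L).getD j 0 * a) lo m := by
        apply gmax_congr
        intro j h1 h2
        simp only [hG, Int.toNat_natCast]
        rw [hch j (by omega), max_mul_of_nonneg _ _ hA]
      rw [hg, gmax_mul_nonneg _ _ _ _ hA, mul_comm]
      simp
    · push_neg at hA
      rw [if_neg (not_le.mpr hA)]
      have hg : gmax (fun j => G (j:Int)) lo m
          = gmax (fun j => (List.zipWith min H L).getD j 0 * a) lo m := by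
        apply gmax_congr
        intro j h1 h2
        simp only [hG, Int.toNat_natCast]
        rw [hcl j (by omega), mul_nonpos_max _ _ _ (le_of_lt hA)]
      rw [hg, gmax_mul_nonpos _ _ _ _ (le_of_lt hA), mul_comm]
      simp

lemma heart_min (H L : List Int) (hL : L.length = H.length) (arr : List Int) (d : Int)
    (i : Nat) (hi : i < H.length) (hn : H.length = arr.length) :
    (PySem.List.pyRange ((i:Int)-1) (max ((i:Int)-d) 0 - 1) (-1)).foldl
        (fun acc j => min acc (min ((H.getD j.toNat 0) * (arr.getD i 0)) ((L.getD j.toNat 0) * (arr.getD i 0)))) 0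
      = (bcell arr d (H, L) i).2 := by
  have hw0 : (0:Int) ≤ max ((i:Int)-d) 0 := le_max_right _ _
  by_cases hle : (i:Int) ≤ max ((i:Int)-d) 0
  · rw [PySem.List.pyRange_neg_one_eq_nil (by omega)]
    simp [bcell, hle]
  · push_neg at hle
    set a := arr.getD i 0 with ha
    set w0 : Int := max ((i:Int)-d) 0 with hw
    set lo : Nat := w0.toNat with hlo
    obtain ⟨m, hm⟩ : ∃ m, i = lo + m + 1 := ⟨i - lo - 1, by omega⟩
    set G : Int → Int := fun j => min ((H.getD j.toNat 0) * a) ((L.getD j.toNat 0) * a) with hG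
    have step1 : PySem.List.pyRange ((i:Int)-1) (w0 - 1) (-1) = (PySem.List.pyRange w0 (i:Int) 1).reverse :=
      pyRange_desc_eq_reverse w0 (i:Int) (by omega)
    rw [step1, foldl_min_reverse, PySem.List.pyRange_one]
    have hcnt : ((i:Int) - w0).toNat = m + 1 := by omega
    rw [hcnt, List.foldl_map]
    have hfun : (fun (acc : Int) (k : Nat) => min acc (G (w0 + (k:Int))))
        = fun acc k => min acc (G (((lo + k : Nat) : Int))) := by
      funext acc k
      congr 2
      omega
    rw [hfun]
    have hrng : (List.range (m+1)).foldl (fun acc k => min acc (G (((lo + k : Nat) : Int)))) 0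
        = (List.range' lo (m+1)).foldl (fun acc (j : Nat) => min acc (G (j:Int))) 0 := by
      rw [List.range'_eq_map_range, List.foldl_map]
    rw [hrng, List.range'_succ, List.foldl_cons]
    rw [foldl_min_shift (List.range' (lo+1) m) (fun j => G (j:Int)) 0 (G (lo:Int)),
      foldl_min_range' (fun j => G (j:Int)) lo m]
    have hch : ∀ j : Nat, j < H.length →
        (List.zipWith max H L).getD j 0 = max (H.getD j 0) (L.getD j 0) :=
      fun j hj => zipWith_max_getD H L hL j hj
    have hcl : ∀ j : Nat, j < H.length →
        (List.zipWith min H L).getD j 0 = min (H.getD j 0) (L.getD j 0) :=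
      fun j hj => zipWith_min_getD H L hL j hj
    have hslice : PySem.List.slice (List.zipWith max H L) (some w0) (some (i:Int))
        = (List.range' lo (m+1)).map (fun j => (List.zipWith max H L).getD j 0) := by
      rw [PySem.List.slice_toNat _ hw0 (by positivity)]
      have : ((i:Int)).toNat - w0.toNat = m + 1 := by omega
      rw [this]
      exact slice_eq_map_range' _ lo (m+1) (by simp [hL]; omega)
    have hslice' : PySem.List.slice (List.zipWith min H L) (some w0) (some (i:Int))
        = (List.range' lo (m+1)).map (fun j => (List.zipWith min H L).getD j 0) := by
      rw [PySem.List.slice_toNat _ hw0 (by positivity)]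
      have : ((i:Int)).toNat - w0.toNat = m + 1 := by omega
      rw [this]
      exact slice_eq_map_range' _ lo (m+1) (by simp [hL]; omega)
    have hwmax : (PySem.List.max? (PySem.List.slice (List.zipWith max H L) (some w0) (some (i:Int))) (fun y => y)).getD 0
        = gmax (fun j => (List.zipWith max H L).getD j 0) lo m := by
      rw [hslice, List.range'_succ, List.map_cons, PySem.List.max?_id_cons, Option.getD_some,
        List.foldl_map, foldl_max_range']
    have hwmin : (PySem.List.min? (PySem.List.slice (List.zipWith min H L) (some w0) (some (i:Int))) (fun y => y)).getD 0
        = gmin (fun j => (List.zipWith min H L).getD j 0) lo m := by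
      rw [hslice', List.range'_succ, List.map_cons, PySem.List.min?_id_cons, Option.getD_some,
        List.foldl_map, foldl_min_range']
    simp only [bcell, PySem.List.pyGetD_natCast, ← ha, ← hw, not_le.mpr hle, if_neg (by omega : ¬ (i:Int) ≤ w0)]
    rw [hwmax, hwmin]
    by_cases hA : 0 ≤ a
    · rw [if_pos hA]
      have hg : gmin (fun j => G (j:Int)) lo m
          = gmin (fun j => (List.zipWith min H L).getD j 0 * a) lo m := by
        apply gmin_congr
        intro j h1 h2
        simp only [hG, Int.toNat_natCast]
        rw [hcl j (by omega), min_mul_of_nonneg _ _ hA]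
      rw [hg, gmin_mul_nonneg _ _ _ _ hA, mul_comm]
      simp
    · push_neg at hA
      rw [if_neg (not_le.mpr hA)]
      have hg : gmin (fun j => G (j:Int)) lo m
          = gmin (fun j => (List.zipWith max H L).getD j 0 * a) lo m := by
        apply gmin_congr
        intro j h1 h2
        simp only [hG, Int.toNat_natCast]
        rw [hch j (by omega), mul_nonpos_min _ _ _ (le_of_lt hA)]
      rw [hg, gmin_mul_nonpos _ _ _ _ (le_of_lt hA), mul_comm]
      simp

-- ---- matrix access lemmas (A side) ----

lemma pvGet2_cast (m : List (List Int)) (r c : Nat) :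
    pvGet2 m (r:Int) (c:Int) = (m.getD r []).getD c 0 := by
  simp only [pvGet2, PySem.List.pyGet?_natCast]
  cases hr : m[r]? with
  | none =>
      have hlen : m.length ≤ r := by
        simpa using List.getElem?_eq_none_iff.mp hr
      rw [List.getD_eq_default _ _ hlen]
      simp
  | some row =>
      have : m.getD r [] = row := by
        simp [List.getD_eq_getElem?_getD, hr]
      rw [this]
      simp [List.getD_eq_getElem?_getD, PySem.List.pyGet?_natCast]

lemma pvGet2_cast' (m : List (List Int)) (r : Nat) (j : Int) (hj : 0 ≤ j) :
    pvGet2 m (r:Int) j = (m.getD r []).getD j.toNat 0 := by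
  simp only [pvGet2, PySem.List.pyGet?_natCast]
  cases hr : m[r]? with
  | none =>
      have hlen : m.length ≤ r := by
        simpa using List.getElem?_eq_none_iff.mp hr
      rw [List.getD_eq_default _ _ hlen]
      simp
  | some row =>
      have : m.getD r [] = row := by
        simp [List.getD_eq_getElem?_getD, hr]
      rw [this]
      simp [PySem.List.pyGet?_of_nonneg (h := hj), List.getD_eq_getElem?_getD]

lemma pvSet2_cast (m : List (List Int)) (r c : Nat) (v : Int) :
    pvSet2 m (r:Int) (c:Int) v = m.set r ((m.getD r []).set c v) := by
  simp [pvSet2]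

lemma length_pvSet2 (m : List (List Int)) (r c : Nat) (v : Int) :
    (pvSet2 m (r:Int) (c:Int) v).length = m.length := by
  rw [pvSet2_cast]; simp

lemma row_pvSet2_ne (m : List (List Int)) (r c : Nat) (v : Int) (r' : Nat) (h : r' ≠ r) :
    (pvSet2 m (r:Int) (c:Int) v).getD r' [] = m.getD r' [] := by
  rw [pvSet2_cast]
  simp [List.getD, List.getElem?_set_ne (Ne.symm h)]

lemma row_pvSet2_self (m : List (List Int)) (r c : Nat) (v : Int) (h : r < m.length) :
    (pvSet2 m (r:Int) (c:Int) v).getD r [] = (m.getD r []).set c v := by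
  rw [pvSet2_cast]
  simp [List.getD, List.getElem?_set_self, h]

lemma pvGet2_pvSet2_self (m : List (List Int)) (r c : Nat) (v : Int)
    (h : r < m.length) (hc : c < (m.getD r []).length) :
    pvGet2 (pvSet2 m (r:Int) (c:Int) v) (r:Int) (c:Int) = v := by
  rw [pvGet2_cast, row_pvSet2_self m r c v h]
  rw [List.getD_eq_getElem _ _ (by simpa using hc)]
  exact List.getElem_set_self ..

lemma pvSet2_pvSet2_self (m : List (List Int)) (r c : Nat) (v w : Int) (h : r < m.length) :
    pvSet2 (pvSet2 m (r:Int) (c:Int) v) (r:Int) (c:Int) w = pvSet2 m (r:Int) (c:Int) w := by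
  rw [pvSet2_cast, pvSet2_cast, pvSet2_cast]
  rw [show (m.set r ((m.getD r []).set c v)).getD r [] = (m.getD r []).set c v from by
    simp [List.getD, List.getElem?_set_self, h]]
  rw [List.set_set, List.set_set]

lemma pvSet2_pvGet2_self (m : List (List Int)) (r c : Nat)
    (h : r < m.length) (hc : c < (m.getD r []).length) :
    pvSet2 m (r:Int) (c:Int) (pvGet2 m (r:Int) (c:Int)) = m := by
  rw [pvSet2_cast, pvGet2_cast]
  have h2 : (m.getD r []).set c ((m.getD r []).getD c 0) = m.getD r [] := by
    rw [List.getD_eq_getElem _ _ hc]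
    exact List.set_getElem_self hc
  rw [h2, List.getD_eq_getElem _ _ h]
  exact List.set_getElem_self h

-- ---- the inner j-loop as two scalar folds (A side) ----

lemma inner_fold (arr : List Int) (d : Int) (t i : Nat) (ht : 1 ≤ t)
    (js : List Int) (hjs : ∀ j ∈ js, 0 ≤ j)
    (m1 m2 : List (List Int)) (h1 : t < m1.length) (h2 : t < m2.length)
    (hi1 : i < (m1.getD t []).length) (hi2 : i < (m2.getD t []).length) :
    js.foldl (fooInner arr d (t:Int) (i:Int)) (m1, m2)
      = (pvSet2 m1 (t:Int) (i:Int)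
           (js.foldl (fun acc j => max acc (max ((m1.getD (t-1) []).getD j.toNat 0 * arr.getD i 0)
             ((m2.getD (t-1) []).getD j.toNat 0 * arr.getD i 0))) (pvGet2 m1 (t:Int) (i:Int))),
         pvSet2 m2 (t:Int) (i:Int)
           (js.foldl (fun acc j => min acc (min ((m1.getD (t-1) []).getD j.toNat 0 * arr.getD i 0)
             ((m2.getD (t-1) []).getD j.toNat 0 * arr.getD i 0))) (pvGet2 m2 (t:Int) (i:Int)))) := by
  induction js generalizing m1 m2 with
  | nil =>
      simp only [List.foldl_nil]
      rw [pvSet2_pvGet2_self m1 t i h1 hi1, pvSet2_pvGet2_self m2 t i h2 hi2]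
  | cons j js ih =>
      have hj0 : 0 ≤ j := hjs j (List.mem_cons_self)
      have hjs' : ∀ x ∈ js, 0 ≤ x := fun x hx => hjs x (List.mem_cons_of_mem _ hx)
      have hcast : (t:Int) - 1 = ((t-1 : Nat) : Int) := by omega
      set a := arr.getD i 0 with ha
      set V1 := max (pvGet2 m1 (t:Int) (i:Int))
        (max (pvGet2 m1 ((t:Int)-1) j * a) (pvGet2 m2 ((t:Int)-1) j * a)) with hV1
      set M1 := pvSet2 m1 (t:Int) (i:Int) V1 with hM1
      set V2 := min (pvGet2 m2 (t:Int) (i:Int))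
        (min (pvGet2 M1 ((t:Int)-1) j * a) (pvGet2 m2 ((t:Int)-1) j * a)) with hV2
      set M2 := pvSet2 m2 (t:Int) (i:Int) V2 with hM2
      have hstep : fooInner arr d (t:Int) (i:Int) (m1, m2) j = (M1, M2) := by
        simp only [fooInner, PySem.List.pyGetD_natCast, hM1, hM2, hV1, hV2, ha]
      have hL1 : t < M1.length := by rw [hM1, length_pvSet2]; exact h1
      have hL2 : t < M2.length := by rw [hM2, length_pvSet2]; exact h2
      have hI1 : i < (M1.getD t []).length := by
        rw [hM1, row_pvSet2_self m1 t i V1 h1]; simpa using hi1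
      have hI2 : i < (M2.getD t []).length := by
        rw [hM2, row_pvSet2_self m2 t i V2 h2]; simpa using hi2
      have hrow1 : M1.getD (t-1) [] = m1.getD (t-1) [] :=
        row_pvSet2_ne m1 t i V1 (t-1) (by omega)
      have hrow2 : M2.getD (t-1) [] = m2.getD (t-1) [] :=
        row_pvSet2_ne m2 t i V2 (t-1) (by omega)
      have hg1 : pvGet2 M1 (t:Int) (i:Int) = V1 := pvGet2_pvSet2_self m1 t i V1 h1 hi1
      have hg2 : pvGet2 M2 (t:Int) (i:Int) = V2 := pvGet2_pvSet2_self m2 t i V2 h2 hi2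
      rw [List.foldl_cons, hstep, ih hjs' M1 M2 hL1 hL2 hI1 hI2]
      rw [hrow1, hrow2, hg1, hg2]
      rw [hM1, pvSet2_pvSet2_self m1 t i _ _ h1, hM2, pvSet2_pvSet2_self m2 t i _ _ h2]
      congr 2
      · rw [hV1, hcast, pvGet2_cast' m1 (t-1) j hj0, pvGet2_cast' m2 (t-1) j hj0,
          List.foldl_cons]
      · rw [hV2, hcast, pvGet2_cast' M1 (t-1) j hj0, pvGet2_cast' m2 (t-1) j hj0, hrow1,
          List.foldl_cons]

-- ---- partial rows ----

lemma partial_set (xs : List Int) (n i : Nat) (hn : xs.length = n) (hi : i < n) :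
    (xs.take i ++ List.replicate (n - i) 0).set i (xs.getD i 0)
      = xs.take (i+1) ++ List.replicate (n - (i+1)) 0 := by
  have hti : (xs.take i).length = i := by simp; omega
  rw [List.set_append_right _ _ (by omega), hti]
  have h1 : n - i = (n - (i+1)) + 1 := by omega
  rw [h1, Nat.sub_self, List.replicate_succ, List.set_cons_zero]
  rw [List.getD_eq_getElem _ _ (by omega), List.take_succ_eq_append_getElem (by omega),
    List.append_assoc]
  rfl

lemma partial_getD (xs : List Int) (n i : Nat) (hn : xs.length = n) (hi : i < n) :
    (xs.take i ++ List.replicate (n - i) 0).getD i 0 = 0 := by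
  have hti : (xs.take i).length = i := by simp; omega
  rw [List.getD_eq_getElem?_getD, List.getElem?_append_right (by omega), hti, Nat.sub_self]
  have : 0 < n - i := by omega
  cases hrep : (n - i) with
  | zero => omega
  | succ p => simp [List.replicate_succ]

lemma partial_length (xs : List Int) (n i : Nat) (hn : xs.length = n) (hi : i ≤ n) :
    (xs.take i ++ List.replicate (n - i) 0).length = n := by
  simp; omega

lemma partial_skip (xs : List Int) (n i : Nat) (hn : xs.length = n) (hi : i < n)
    (h0 : xs.getD i 0 = 0) :
    xs.take i ++ List.replicate (n - i) 0 = xs.take (i+1) ++ List.replicate (n - (i+1)) 0 := by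
  rw [← partial_set xs n i hn hi, h0]
  have hlen : i < (xs.take i ++ List.replicate (n - i) 0).length := by
    rw [partial_length xs n i hn (by omega)]; exact hi
  have h2 : (xs.take i ++ List.replicate (n - i) 0)[i] = 0 := by
    have h3 := partial_getD xs n i hn hi
    rwa [List.getD_eq_getElem _ _ hlen] at h3
  conv_lhs => rw [← List.set_getElem_self hlen]
  rw [h2]

-- ---- the layer matrices (A side) ----

def pmat1 (arr : List Int) (d : Int) (kN t i : Nat) : List (List Int) :=
  (List.range kN).map (fun r =>
    if r < t then (FB arr d r).1
    else if r = t then (FB arr d t).1.take i ++ List.replicate (arr.length - i) 0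
    else List.replicate arr.length 0)

def pmat2 (arr : List Int) (d : Int) (kN t i : Nat) : List (List Int) :=
  (List.range kN).map (fun r =>
    if r < t then (FB arr d r).2
    else if r = t then (FB arr d t).2.take i ++ List.replicate (arr.length - i) 0
    else List.replicate arr.length 0)

lemma length_pmat1 (arr : List Int) (d : Int) (kN t i : Nat) : (pmat1 arr d kN t i).length = kN := by
  simp [pmat1]

lemma length_pmat2 (arr : List Int) (d : Int) (kN t i : Nat) : (pmat2 arr d kN t i).length = kN := by
  simp [pmat2]

lemma row_pmat1 (arr : List Int) (d : Int) (kN t i r : Nat) (hr : r < kN) :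
    (pmat1 arr d kN t i).getD r []
      = (if r < t then (FB arr d r).1
         else if r = t then (FB arr d t).1.take i ++ List.replicate (arr.length - i) 0
         else List.replicate arr.length 0) := by
  rw [List.getD_eq_getElem _ _ (by simp [pmat1, hr])]
  simp [pmat1]

lemma row_pmat2 (arr : List Int) (d : Int) (kN t i r : Nat) (hr : r < kN) :
    (pmat2 arr d kN t i).getD r []
      = (if r < t then (FB arr d r).2
         else if r = t then (FB arr d t).2.take i ++ List.replicate (arr.length - i) 0
         else List.replicate arr.length 0) := by
  rw [List.getD_eq_getElem _ _ (by simp [pmat2, hr])]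
  simp [pmat2]

lemma pmat1_init (arr : List Int) (d : Int) (kN : Nat) :
    pmat1 arr d kN 0 0 = List.replicate kN (List.replicate arr.length 0) := by
  apply List.ext_getElem
  · simp [pmat1]
  · intro r hr1 hr2
    simp only [pmat1, List.getElem_map, List.getElem_range, List.getElem_replicate]
    split_ifs with h1 h2
    · omega
    · simp [FB]
    · rfl

lemma pmat2_init (arr : List Int) (d : Int) (kN : Nat) :
    pmat2 arr d kN 0 0 = List.replicate kN (List.replicate arr.length 0) := by
  apply List.ext_getElem
  · simp [pmat2]
  · intro r hr1 hr2
    simp only [pmat2, List.getElem_map, List.getElem_range, List.getElem_replicate]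
    split_ifs with h1 h2
    · omega
    · simp [FB]
    · rfl

lemma pmat1_roll (arr : List Int) (d : Int) (kN t : Nat) :
    pmat1 arr d kN t arr.length = pmat1 arr d kN (t+1) 0 := by
  apply List.ext_getElem
  · simp [pmat1]
  · intro r hr1 hr2
    simp only [pmat1, List.getElem_map, List.getElem_range]
    rcases lt_trichotomy r t with h | h | h
    · rw [if_pos h, if_pos (by omega)]
    · subst h
      rw [if_neg (by omega), if_pos rfl, if_pos (by omega)]
      simp [List.take_of_length_le (le_of_eq (length_FB1 arr d r))]
    · rw [if_neg (by omega), if_neg (by omega), if_neg (by omega)]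
      by_cases h2 : r = t + 1
      · rw [if_pos h2]
        simp
      · rw [if_neg h2]

lemma pmat2_roll (arr : List Int) (d : Int) (kN t : Nat) :
    pmat2 arr d kN t arr.length = pmat2 arr d kN (t+1) 0 := by
  apply List.ext_getElem
  · simp [pmat2]
  · intro r hr1 hr2
    simp only [pmat2, List.getElem_map, List.getElem_range]
    rcases lt_trichotomy r t with h | h | h
    · rw [if_pos h, if_pos (by omega)]
    · subst h
      rw [if_neg (by omega), if_pos rfl, if_pos (by omega)]
      simp [List.take_of_length_le (le_of_eq (length_FB2 arr d r))]
    · rw [if_neg (by omega), if_neg (by omega), if_neg (by omega)]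
      by_cases h2 : r = t + 1
      · rw [if_pos h2]
        simp
      · rw [if_neg h2]

lemma set_row_pmat1 (arr : List Int) (d : Int) (kN t i i' : Nat) (ht : t < kN) :
    (pmat1 arr d kN t i).set t ((FB arr d t).1.take i' ++ List.replicate (arr.length - i') 0)
      = pmat1 arr d kN t i' := by
  apply List.ext_getElem
  · simp [pmat1]
  · intro r hr1 hr2
    by_cases h : r = t
    · subst h
      rw [List.getElem_set_self (by simpa [pmat1] using (by simpa [pmat1] using hr2 : r < kN))]
      simp only [pmat1, List.getElem_map, List.getElem_range]
      simp
    · rw [List.getElem_set_ne (Ne.symm h)]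
      simp only [pmat1, List.getElem_map, List.getElem_range]
      rcases lt_trichotomy r t with h2 | h2 | h2
      · rw [if_pos h2, if_pos h2]
      · omega
      · rw [if_neg (by omega), if_neg (by omega), if_neg (by omega), if_neg (by omega)]

lemma set_row_pmat2 (arr : List Int) (d : Int) (kN t i i' : Nat) (ht : t < kN) :
    (pmat2 arr d kN t i).set t ((FB arr d t).2.take i' ++ List.replicate (arr.length - i') 0)
      = pmat2 arr d kN t i' := by
  apply List.ext_getElem
  · simp [pmat2]
  · intro r hr1 hr2
    by_cases h : r = t
    · subst h
      rw [List.getElem_set_self (by simpa [pmat2] using (by simpa [pmat2] using hr2 : r < kN))]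
      simp only [pmat2, List.getElem_map, List.getElem_range]
      simp
    · rw [List.getElem_set_ne (Ne.symm h)]
      simp only [pmat2, List.getElem_map, List.getElem_range]
      rcases lt_trichotomy r t with h2 | h2 | h2
      · rw [if_pos h2, if_pos h2]
      · omega
      · rw [if_neg (by omega), if_neg (by omega), if_neg (by omega), if_neg (by omega)]

-- ---- one cell of one layer (A side) ----

lemma hjs_nonneg (i : Nat) (d : Int) :
    ∀ j ∈ PySem.List.pyRange ((i:Int)-1) (max ((i:Int)-d) 0 - 1) (-1), 0 ≤ j := by
  intro x hx
  have hw0 : (0:Int) ≤ max ((i:Int)-d) 0 := le_max_right _ _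
  rw [PySem.List.pyRange_neg_one] at hx
  simp only [List.mem_map, List.mem_range] at hx
  obtain ⟨kk, hk, rfl⟩ := hx
  omega

lemma cell_step (arr : List Int) (d : Int) (kN t i : Nat) (ht : t < kN) (hi : i < arr.length) :
    fooCell arr d (t:Int) (pmat1 arr d kN t i, pmat2 arr d kN t i) (i:Int)
      = (pmat1 arr d kN t (i+1), pmat2 arr d kN t (i+1)) := by
  by_cases h0 : t = 0
  · subst h0
    rw [fooCell, if_pos (by simp : ((0:Nat):Int) = 0)]
    simp only [PySem.List.pyGetD_natCast]
    have hrow : (pmat1 arr d kN 0 i).getD 0 [] = arr.take i ++ List.replicate (arr.length - i) 0 := by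
      rw [row_pmat1 arr d kN 0 i 0 ht]
      simp [FB]
    have hrow2 : (pmat2 arr d kN 0 i).getD 0 [] = arr.take i ++ List.replicate (arr.length - i) 0 := by
      rw [row_pmat2 arr d kN 0 i 0 ht]
      simp [FB]
    rw [show ((0:Int)) = ((0:Nat):Int) from rfl]
    rw [pvSet2_cast, pvSet2_cast, hrow, hrow2]
    simp only [Nat.cast_zero]
    rw [partial_set arr arr.length i rfl hi]
    rw [show (arr.take (i+1) ++ List.replicate (arr.length - (i+1)) 0)
        = (FB arr d 0).1.take (i+1) ++ List.replicate (arr.length - (i+1)) 0 from rfl]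
    rw [set_row_pmat1 arr d kN 0 i (i+1) ht]
    rw [show ((FB arr d 0).1.take (i+1) ++ List.replicate (arr.length - (i+1)) 0)
        = (FB arr d 0).2.take (i+1) ++ List.replicate (arr.length - (i+1)) 0 from rfl]
    rw [set_row_pmat2 arr d kN 0 i (i+1) ht]
  · have ht1 : 1 ≤ t := by omega
    rw [fooCell, if_neg (by exact_mod_cast h0)]
    obtain ⟨s, rfl⟩ : ∃ s, t = s + 1 := ⟨t - 1, by omega⟩
    have hn1 : (FB arr d s).1.length = arr.length := length_FB1 arr d s
    have hn2 : (FB arr d s).2.length = arr.length := length_FB2 arr d s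
    have hrow1 : (pmat1 arr d kN (s+1) i).getD (s+1) []
        = (FB arr d (s+1)).1.take i ++ List.replicate (arr.length - i) 0 := by
      rw [row_pmat1 arr d kN (s+1) i (s+1) ht]
      simp
    have hrow2 : (pmat2 arr d kN (s+1) i).getD (s+1) []
        = (FB arr d (s+1)).2.take i ++ List.replicate (arr.length - i) 0 := by
      rw [row_pmat2 arr d kN (s+1) i (s+1) ht]
      simp
    have hprev1 : (pmat1 arr d kN (s+1) i).getD ((s+1)-1) [] = (FB arr d s).1 := by
      rw [row_pmat1 arr d kN (s+1) i ((s+1)-1) (by omega)]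
      simp
    have hprev2 : (pmat2 arr d kN (s+1) i).getD ((s+1)-1) [] = (FB arr d s).2 := by
      rw [row_pmat2 arr d kN (s+1) i ((s+1)-1) (by omega)]
      simp
    have hI1 : i < ((pmat1 arr d kN (s+1) i).getD (s+1) []).length := by
      rw [hrow1, partial_length _ _ _ (length_FB1 arr d (s+1)) (by omega)]
      exact hi
    have hI2 : i < ((pmat2 arr d kN (s+1) i).getD (s+1) []).length := by
      rw [hrow2, partial_length _ _ _ (length_FB2 arr d (s+1)) (by omega)]
      exact hi
    rw [inner_fold arr d (s+1) i (by omega) _ (hjs_nonneg i d) _ _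
      (by rw [length_pmat1]; exact ht) (by rw [length_pmat2]; exact ht) hI1 hI2]
    have hget1 : pvGet2 (pmat1 arr d kN (s+1) i) ((s+1:Nat):Int) ((i:Nat):Int) = 0 := by
      rw [pvGet2_cast, hrow1, partial_getD _ _ _ (length_FB1 arr d (s+1)) hi]
    have hget2 : pvGet2 (pmat2 arr d kN (s+1) i) ((s+1:Nat):Int) ((i:Nat):Int) = 0 := by
      rw [pvGet2_cast, hrow2, partial_getD _ _ _ (length_FB2 arr d (s+1)) hi]
    rw [hprev1, hprev2, hget1, hget2]
    rw [heart_max (FB arr d s).1 (FB arr d s).2 (by omega) arr d i (by omega) hn1]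
    rw [heart_min (FB arr d s).1 (FB arr d s).2 (by omega) arr d i (by omega) hn1]
    have hpair : ((FB arr d s).1, (FB arr d s).2) = FB arr d s := rfl
    rw [hpair]
    rw [show (bcell arr d (FB arr d s) i).1 = (FB arr d (s+1)).1.getD i 0 from
      (getD_FB1 arr d s i hi).symm]
    rw [show (bcell arr d (FB arr d s) i).2 = (FB arr d (s+1)).2.getD i 0 from
      (getD_FB2 arr d s i hi).symm]
    rw [pvSet2_cast, pvSet2_cast, hrow1, hrow2,
      partial_set _ _ _ (length_FB1 arr d (s+1)) hi,
      partial_set _ _ _ (length_FB2 arr d (s+1)) hi,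
      set_row_pmat1 arr d kN (s+1) i (i+1) ht, set_row_pmat2 arr d kN (s+1) i (i+1) ht]

-- ---- one full layer, all layers (A side) ----

lemma layer_prefix (arr : List Int) (d : Int) (kN t : Nat) (ht : t < kN) :
    ∀ p, p ≤ arr.length →
      (List.range p).foldl (fun st (q : Nat) => fooCell arr d (t:Int) st (q:Int))
          (pmat1 arr d kN t 0, pmat2 arr d kN t 0)
        = (pmat1 arr d kN t p, pmat2 arr d kN t p) := by
  intro p
  induction p with
  | zero => intro _; rfl
  | succ q ih =>
      intro hp
      rw [List.range_succ, List.foldl_append, ih (by omega)]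
      simp only [List.foldl_cons, List.foldl_nil]
      exact cell_step arr d kN t q ht (by omega)

lemma layer_step (arr : List Int) (d : Int) (kN t : Nat) (ht : t < kN) :
    fooLayer arr d (pmat1 arr d kN t 0, pmat2 arr d kN t 0) (t:Int)
      = (pmat1 arr d kN (t+1) 0, pmat2 arr d kN (t+1) 0) := by
  rw [fooLayer, PySem.List.len_eq, PySem.List.pyRange_zero_natCast, List.foldl_map]
  rw [layer_prefix arr d kN t ht arr.length (le_refl _)]
  rw [pmat1_roll, pmat2_roll]

lemma outer_prefix (arr : List Int) (d : Int) (kN : Nat) :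
    ∀ t, t ≤ kN →
      (List.range t).foldl (fun st (q : Nat) => fooLayer arr d st (q:Int))
          (pmat1 arr d kN 0 0, pmat2 arr d kN 0 0)
        = (pmat1 arr d kN t 0, pmat2 arr d kN t 0) := by
  intro t
  induction t with
  | zero => intro _; rfl
  | succ q ih =>
      intro hp
      rw [List.range_succ, List.foldl_append, ih (by omega)]
      simp only [List.foldl_cons, List.foldl_nil]
      exact layer_step arr d kN q (by omega)

lemma final_get (arr : List Int) (d : Int) (kN : Nat) (hk : 1 ≤ kN) (ha : arr ≠ []) :
    pvGet2 (pmat1 arr d kN kN 0) (-1) (-1) = (FB arr d (kN - 1)).1.getD (arr.length - 1) 0 := by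
  have hn : (FB arr d (kN-1)).1.length = arr.length := length_FB1 arr d (kN-1)
  have hlen : 0 < arr.length := List.length_pos_of_ne_nil ha
  simp only [pvGet2, PySem.List.pyGet?_neg_one]
  have hm : (pmat1 arr d kN kN 0).getLast? = some ((FB arr d (kN-1)).1) := by
    rw [List.getLast?_eq_getElem?, length_pmat1]
    simp only [pmat1, List.getElem?_map, List.getElem?_range (show kN - 1 < kN by omega),
      Option.map_some]
    rw [if_pos (by omega)]
  rw [hm]
  rw [show ((some (FB arr d (kN-1)).1).bind (fun a => a.getLast?))
      = (FB arr d (kN-1)).1.getLast? from rfl]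
  rw [List.getLast?_eq_getElem?, hn,
    List.getElem?_eq_getElem (by omega : arr.length - 1 < (FB arr d (kN-1)).1.length)]
  rw [List.getD_eq_getElem _ _ (by omega : arr.length - 1 < (FB arr d (kN-1)).1.length)]
  rfl

lemma foo_eq (arr : List Int) (k : Int) (d : Int) (hk : 1 ≤ k) (ha : arr ≠ []) :
    foo arr k d = (FB arr d (k.toNat - 1)).1.getD (arr.length - 1) 0 := by
  have hkN : 1 ≤ k.toNat := by omega
  simp only [foo]
  have hk' : k = ((k.toNat : Nat) : Int) := by omega
  rw [hk', PySem.List.pyRange_zero_natCast, List.foldl_map]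
  simp only [Int.toNat_natCast]
  rw [show (List.replicate k.toNat (List.replicate arr.length 0),
        List.replicate k.toNat (List.replicate arr.length 0))
      = (pmat1 arr d k.toNat 0 0, pmat2 arr d k.toNat 0 0) from by
    rw [pmat1_init, pmat2_init]]
  rw [outer_prefix arr d k.toNat k.toNat (le_refl _)]
  exact final_get arr d k.toNat hkN ha

-- ===== B-side: monotonic deque correctness =====

def Vmax (H L : List Int) (j : Nat) : Int := max (H.getD j 0) (L.getD j 0)
def Wmin (H L : List Int) (j : Nat) : Int := min (H.getD j 0) (L.getD j 0)

-- j survives in the max-deque over prefix t iff every later value is strictly smaller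
def keepB (V : Nat → Int) (t j : Nat) : Bool :=
  (List.range t).all (fun j' => decide (j' ≤ j) || decide (V j' < V j))

def keepC (W : Nat → Int) (t j : Nat) : Bool :=
  (List.range t).all (fun j' => decide (j' ≤ j) || decide (W j < W j'))

-- the live contents of the max-deque: surviving indices ≥ threshold, in order
def skel (V : Nat → Int) (t : Nat) (thr : Int) : List (Int × Int) :=
  ((List.range t).filter (fun (j : Nat) => decide (thr ≤ (j:Int)) && keepB V t j)).map
    (fun (j : Nat) => ((j:Int), V j))

def skelMin (W : Nat → Int) (t : Nat) (thr : Int) : List (Int × Int) :=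
  ((List.range t).filter (fun (j : Nat) => decide (thr ≤ (j:Int)) && keepC W t j)).map
    (fun (j : Nat) => ((j:Int), W j))

lemma keepB_succ (V : Nat → Int) (t j : Nat) (hj : j < t) :
    keepB V (t+1) j = (keepB V t j && decide (V t < V j)) := by
  unfold keepB
  rw [List.range_succ, List.all_append]
  simp [show ¬ t ≤ j by omega]

lemma keepC_succ (W : Nat → Int) (t j : Nat) (hj : j < t) :
    keepC W (t+1) j = (keepC W t j && decide (W j < W t)) := by
  unfold keepC
  rw [List.range_succ, List.all_append]
  simp [show ¬ t ≤ j by omega]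

lemma keepB_self (V : Nat → Int) (t : Nat) : keepB V (t+1) t = true := by
  unfold keepB
  rw [List.all_eq_true]
  intro j' hj'
  simp only [List.mem_range] at hj'
  simp [show j' ≤ t by omega]

lemma keepC_self (W : Nat → Int) (t : Nat) : keepC W (t+1) t = true := by
  unfold keepC
  rw [List.all_eq_true]
  intro j' hj'
  simp only [List.mem_range] at hj'
  simp [show j' ≤ t by omega]

-- popAbs: the abstract back-pop acting on the live part only
def popAbs (l : List (Int × Int)) (v : Int) : List (Int × Int) :=
  if h : l ≠ [] ∧ (l.getLast?.getD (0, 0)).2 ≤ v then popAbs l.dropLast v else l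
termination_by l.length
decreasing_by
  have h1 : 0 < l.length := List.length_pos_of_ne_nil h.1
  simpa using h1

def popAbsMin (l : List (Int × Int)) (w : Int) : List (Int × Int) :=
  if h : l ≠ [] ∧ w ≤ (l.getLast?.getD (0, 0)).2 then popAbsMin l.dropLast w else l
termination_by l.length
decreasing_by
  have h1 : 0 < l.length := List.length_pos_of_ne_nil h.1
  simpa using h1

lemma popMaxBack_append (dead : List (Int × Int)) (v : Int) (live : List (Int × Int)) :
    popMaxBack (dead ++ live) dead.length v = dead ++ popAbs live v := by
  induction live using List.reverseRecOn with
  | nil =>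
      rw [popMaxBack.eq_def, popAbs.eq_def]
      simp
  | append_singleton l e ih =>
      rw [popMaxBack.eq_def, popAbs.eq_def]
      have hlast : ((dead ++ (l ++ [e])).getLast?.getD (0,0)) = e := by simp
      have hlen : dead.length < (dead ++ (l ++ [e])).length := by simp
      by_cases hc : e.2 ≤ v
      · rw [dif_pos ⟨hlen, by rw [hlast]; exact hc⟩,
          dif_pos ⟨by simp, by simp [hc]⟩]
        have hdl : (dead ++ (l ++ [e])).dropLast = dead ++ l := by
          rw [← List.append_assoc, List.dropLast_concat]
        have hdl2 : (l ++ [e]).dropLast = l := List.dropLast_concat ..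
        rw [hdl, hdl2, ih]
      · rw [dif_neg (by rw [hlast]; tauto), dif_neg (by simp [hc])]

lemma popMinBack_append (dead : List (Int × Int)) (w : Int) (live : List (Int × Int)) :
    popMinBack (dead ++ live) dead.length w = dead ++ popAbsMin live w := by
  induction live using List.reverseRecOn with
  | nil =>
      rw [popMinBack.eq_def, popAbsMin.eq_def]
      simp
  | append_singleton l e ih =>
      rw [popMinBack.eq_def, popAbsMin.eq_def]
      have hlast : ((dead ++ (l ++ [e])).getLast?.getD (0,0)) = e := by simp
      have hlen : dead.length < (dead ++ (l ++ [e])).length := by simp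
      by_cases hc : w ≤ e.2
      · rw [dif_pos ⟨hlen, by rw [hlast]; exact hc⟩,
          dif_pos ⟨by simp, by simp [hc]⟩]
        have hdl : (dead ++ (l ++ [e])).dropLast = dead ++ l := by
          rw [← List.append_assoc, List.dropLast_concat]
        have hdl2 : (l ++ [e]).dropLast = l := List.dropLast_concat ..
        rw [hdl, hdl2, ih]
      · rw [dif_neg (by rw [hlast]; tauto), dif_neg (by simp [hc])]

lemma popAbs_split (v : Int) (l2 l1 : List (Int × Int))
    (h1 : ∀ e ∈ l1, v < e.2) (h2 : ∀ e ∈ l2, e.2 ≤ v) :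
    popAbs (l1 ++ l2) v = l1 := by
  induction l2 using List.reverseRecOn generalizing l1 with
  | nil =>
      rw [List.append_nil, popAbs.eq_def]
      rcases l1.eq_nil_or_concat with rfl | ⟨l', e, rfl⟩
      · simp
      · rw [dif_neg]
        rintro ⟨-, hle⟩
        have he : e ∈ l'.concat e := by simp
        have := h1 e he
        simp at hle
        omega
  | append_singleton l2 e ih =>
      rw [popAbs.eq_def]
      rw [dif_pos ⟨by simp, by
        have : ((l1 ++ (l2 ++ [e])).getLast?.getD (0,0)) = e := by simp
        rw [this]
        exact h2 e (by simp)⟩]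
      have hdl : (l1 ++ (l2 ++ [e])).dropLast = l1 ++ l2 := by
        rw [← List.append_assoc, List.dropLast_concat]
      rw [hdl]
      exact ih l1 h1 (fun x hx => h2 x (by simp [hx]))

lemma popAbsMin_split (w : Int) (l2 l1 : List (Int × Int))
    (h1 : ∀ e ∈ l1, e.2 < w) (h2 : ∀ e ∈ l2, w ≤ e.2) :
    popAbsMin (l1 ++ l2) w = l1 := by
  induction l2 using List.reverseRecOn generalizing l1 with
  | nil =>
      rw [List.append_nil, popAbsMin.eq_def]
      rcases l1.eq_nil_or_concat with rfl | ⟨l', e, rfl⟩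
      · simp
      · rw [dif_neg]
        rintro ⟨-, hle⟩
        have he : e ∈ l'.concat e := by simp
        have := h1 e he
        simp at hle
        omega
  | append_singleton l2 e ih =>
      rw [popAbsMin.eq_def]
      rw [dif_pos ⟨by simp, by
        have : ((l1 ++ (l2 ++ [e])).getLast?.getD (0,0)) = e := by simp
        rw [this]
        exact h2 e (by simp)⟩]
      have hdl : (l1 ++ (l2 ++ [e])).dropLast = l1 ++ l2 := by
        rw [← List.append_assoc, List.dropLast_concat]
      rw [hdl]
      exact ih l1 h1 (fun x hx => h2 x (by simp [hx]))

-- evictFront only moves the head pointer; the live part is the dropWhile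
lemma evictFront_spec (q : List (Int × Int)) (t : Int) :
    ∀ (n f : Nat), q.length - f ≤ n → f ≤ q.length →
      f ≤ evictFront q f t ∧ evictFront q f t ≤ q.length ∧
      q.drop (evictFront q f t) = (q.drop f).dropWhile (fun e => decide (e.1 < t)) := by
  intro n
  induction n with
  | zero =>
      intro f h1 h2
      have hf : f = q.length := by omega
      rw [evictFront.eq_def, dif_neg (by omega)]
      refine ⟨le_refl f, h2, ?_⟩
      rw [List.drop_eq_nil_of_le (by omega)]
      rfl
  | succ n ih =>
      intro f h1 h2
      rw [evictFront.eq_def]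
      by_cases hc : f < q.length ∧ (q.getD f (0,0)).1 < t
      · rw [dif_pos hc]
        obtain ⟨h3, h4, h5⟩ := ih (f+1) (by omega) (by omega)
        refine ⟨by omega, h4, ?_⟩
        rw [h5, List.drop_eq_getElem_cons hc.1, List.dropWhile_cons]
        rw [List.getD_eq_getElem _ _ hc.1] at hc
        simp [hc.2]
      · rw [dif_neg hc]
        refine ⟨le_refl f, h2, ?_⟩
        by_cases hf : f < q.length
        · have hB : ¬ (q.getD f (0,0)).1 < t := fun hb => hc ⟨hf, hb⟩
          rw [List.drop_eq_getElem_cons hf, List.dropWhile_cons]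
          rw [List.getD_eq_getElem _ _ hf] at hB
          simp [hB]
        · rw [List.drop_eq_nil_of_le (by omega)]
          rfl

lemma getD_eq_headD_drop (q : List (Int × Int)) (f : Nat) (hf : f < q.length) :
    q.getD f (0,0) = (q.drop f).headD (0,0) := by
  rw [List.drop_eq_getElem_cons hf, List.getD_eq_getElem _ _ hf]
  rfl

-- ---- ordering facts about the skeleton ----

lemma map_filter_pair_idx (V : Nat → Int) (t : Nat) (P : Nat → Bool) :
    ((((List.range t).filter P).map (fun (j : Nat) => ((j:Int), V j))).Pairwise
      (fun a b => a.1 < b.1)) := by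
  have h1 : ((List.range t).filter P).Pairwise (fun a b => a < b) :=
    List.Pairwise.filter P List.pairwise_lt_range
  exact List.Pairwise.map _ (fun a b hab => by
    show ((a:Nat):Int) < ((b:Nat):Int)
    exact_mod_cast hab) h1

lemma skel_pair_val (V : Nat → Int) (t : Nat) (thr : Int) :
    (skel V t thr).Pairwise (fun a b => b.2 < a.2) := by
  unfold skel
  refine List.Pairwise.map _ (fun a b hab => hab) ?_
  refine List.Pairwise.imp_of_mem ?_ (List.Pairwise.filter _ List.pairwise_lt_range)
  intro a b ha hb hab
  simp only [List.mem_filter, List.mem_range] at ha hb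
  have hk := ha.2
  rw [Bool.and_eq_true] at hk
  have hk2 := hk.2
  unfold keepB at hk2
  rw [List.all_eq_true] at hk2
  have h3 := hk2 b (by simp [hb.1])
  simp only [Bool.or_eq_true, decide_eq_true_eq] at h3
  rcases h3 with h3 | h3
  · omega
  · exact h3

lemma skelMin_pair_val (W : Nat → Int) (t : Nat) (thr : Int) :
    (skelMin W t thr).Pairwise (fun a b => a.2 < b.2) := by
  unfold skelMin
  refine List.Pairwise.map _ (fun a b hab => hab) ?_
  refine List.Pairwise.imp_of_mem ?_ (List.Pairwise.filter _ List.pairwise_lt_range)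
  intro a b ha hb hab
  simp only [List.mem_filter, List.mem_range] at ha hb
  have hk := ha.2
  rw [Bool.and_eq_true] at hk
  have hk2 := hk.2
  unfold keepC at hk2
  rw [List.all_eq_true] at hk2
  have h3 := hk2 b (by simp [hb.1])
  simp only [Bool.or_eq_true, decide_eq_true_eq] at h3
  rcases h3 with h3 | h3
  · omega
  · exact h3

lemma filter_split {α : Type} (Q : α → Bool) :
    ∀ (l : List α), l.Pairwise (fun a b => Q b = true → Q a = true) →
      l = l.filter Q ++ l.filter (fun a => !Q a) := by
  intro l
  induction l with
  | nil => intro _; rfl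
  | cons a l ih =>
      intro h
      rw [List.pairwise_cons] at h
      by_cases hq : Q a = true
      · simp only [List.filter_cons, hq, Bool.not_true, Bool.false_eq_true, if_true, if_false]
        rw [List.cons_append, ← ih h.2]
      · have hq' : Q a = false := by revert hq; cases Q a <;> simp
        have hall : ∀ b ∈ l, Q b = false := by
          intro b hb
          by_contra hc
          have hbt : Q b = true := by revert hc; cases Q b <;> simp
          have h3 := h.1 b hb hbt
          rw [hq'] at h3
          exact Bool.false_ne_true h3
        have h1 : l.filter Q = [] := by
          rw [List.filter_eq_nil_iff]
          intro b hb
          simp [hall b hb]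
        have h2 : l.filter (fun a => !Q a) = l := by
          rw [List.filter_eq_self]
          intro b hb
          simp [hall b hb]
        simp only [List.filter_cons, hq', Bool.not_false, Bool.false_eq_true, if_false, if_true]
        rw [h1, h2, List.nil_append]

lemma dropWhile_idx (s : Int) :
    ∀ (l : List (Int × Int)), l.Pairwise (fun a b => a.1 < b.1) →
      l.dropWhile (fun e => decide (e.1 < s)) = l.filter (fun e => decide (s ≤ e.1)) := by
  intro l
  induction l with
  | nil => intro _; rfl
  | cons a l ih =>
      intro h
      rw [List.pairwise_cons] at h
      rw [List.dropWhile_cons, List.filter_cons]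
      by_cases hc : a.1 < s
      · have d1 : decide (a.1 < s) = true := by simpa using hc
        have d2 : decide (s ≤ a.1) = false := by simp; omega
        rw [d1, d2]
        simp only [if_true, Bool.false_eq_true, if_false]
        exact ih h.2
      · have d1 : decide (a.1 < s) = false := by simpa using hc
        have d2 : decide (s ≤ a.1) = true := by simp; omega
        rw [d1, d2]
        simp only [if_true, Bool.false_eq_true, if_false]
        congr 1
        symm
        rw [List.filter_eq_self]
        intro b hb
        have h3 := h.1 b hb
        simp only [decide_eq_true_eq]
        omega

-- pushing V t pops exactly the survivors that V t dominates
lemma skel_push (V : Nat → Int) (t : Nat) (thr : Int) :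
    popAbs (skel V t thr) (V t)
      = ((List.range t).filter (fun (j : Nat) => decide (thr ≤ (j:Int)) && keepB V (t+1) j)).map
          (fun (j : Nat) => ((j:Int), V j)) := by
  set Q : (Int × Int) → Bool := fun e => decide (V t < e.2) with hQ
  have hpair : (skel V t thr).Pairwise (fun a b => Q b = true → Q a = true) := by
    apply (skel_pair_val V t thr).imp
    intro a b hab
    simp only [hQ, decide_eq_true_eq]
    omega
  have hsplit := filter_split Q _ hpair
  have h1 : ∀ e ∈ (skel V t thr).filter Q, V t < e.2 := by
    intro e he
    rw [List.mem_filter] at he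
    simpa [hQ] using he.2
  have h2 : ∀ e ∈ (skel V t thr).filter (fun a => !Q a), e.2 ≤ V t := by
    intro e he
    rw [List.mem_filter] at he
    have := he.2
    simp only [hQ, Bool.not_eq_true', decide_eq_false_iff_not] at this
    omega
  calc popAbs (skel V t thr) (V t)
      = popAbs ((skel V t thr).filter Q ++ (skel V t thr).filter (fun a => !Q a)) (V t) := by
        rw [← hsplit]
    _ = (skel V t thr).filter Q := popAbs_split (V t) _ _ h1 h2
    _ = _ := by
        unfold skel
        rw [List.filter_map]
        congr 1
        rw [List.filter_filter]
        apply List.filter_congr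
        intro j hj
        simp only [List.mem_range] at hj
        rw [keepB_succ V t j hj]
        simp only [hQ, Function.comp]
        by_cases ha : thr ≤ (j:Int) <;> by_cases hb : keepB V t j <;>
          by_cases hcv : V t < V j <;> simp [ha, hb, hcv]

lemma skelMin_push (W : Nat → Int) (t : Nat) (thr : Int) :
    popAbsMin (skelMin W t thr) (W t)
      = ((List.range t).filter (fun (j : Nat) => decide (thr ≤ (j:Int)) && keepC W (t+1) j)).map
          (fun (j : Nat) => ((j:Int), W j)) := by
  set Q : (Int × Int) → Bool := fun e => decide (e.2 < W t) with hQ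
  have hpair : (skelMin W t thr).Pairwise (fun a b => Q b = true → Q a = true) := by
    apply (skelMin_pair_val W t thr).imp
    intro a b hab
    simp only [hQ, decide_eq_true_eq]
    omega
  have hsplit := filter_split Q _ hpair
  have h1 : ∀ e ∈ (skelMin W t thr).filter Q, e.2 < W t := by
    intro e he
    rw [List.mem_filter] at he
    simpa [hQ] using he.2
  have h2 : ∀ e ∈ (skelMin W t thr).filter (fun a => !Q a), W t ≤ e.2 := by
    intro e he
    rw [List.mem_filter] at he
    have := he.2
    simp only [hQ, Bool.not_eq_true', decide_eq_false_iff_not] at this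
    omega
  calc popAbsMin (skelMin W t thr) (W t)
      = popAbsMin ((skelMin W t thr).filter Q ++ (skelMin W t thr).filter (fun a => !Q a)) (W t) := by
        rw [← hsplit]
    _ = (skelMin W t thr).filter Q := popAbsMin_split (W t) _ _ h1 h2
    _ = _ := by
        unfold skelMin
        rw [List.filter_map]
        congr 1
        rw [List.filter_filter]
        apply List.filter_congr
        intro j hj
        simp only [List.mem_range] at hj
        rw [keepC_succ W t j hj]
        simp only [hQ, Function.comp]
        by_cases ha : thr ≤ (j:Int) <;> by_cases hb : keepC W t j <;>
          by_cases hcv : W j < W t <;> simp [ha, hb, hcv]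

-- push then evict advances the skeleton one prefix step
lemma skel_step (V : Nat → Int) (t : Nat) (d : Int) :
    ((popAbs (skel V t ((t:Int) - d)) (V t)) ++ [((t:Int), V t)]).dropWhile
        (fun e => decide (e.1 < (t:Int) + 1 - d))
      = skel V (t+1) (((t:Int) + 1) - d) := by
  rw [skel_push]
  set P : Nat → Bool := fun (j : Nat) => decide ((t:Int) - d ≤ (j:Int)) && keepB V (t+1) j with hP
  have hpi : ((((List.range t).filter P).map (fun (j : Nat) => ((j:Int), V j))) ++ [((t:Int), V t)]).Pairwise
      (fun a b => a.1 < b.1) := by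
    rw [List.pairwise_append]
    refine ⟨map_filter_pair_idx V t P, List.pairwise_singleton _ _, ?_⟩
    intro a ha b hb
    simp only [List.mem_map, List.mem_filter, List.mem_range] at ha
    obtain ⟨j, ⟨hj, _⟩, rfl⟩ := ha
    simp only [List.mem_singleton] at hb
    subst hb
    simp only
    exact_mod_cast hj
  rw [dropWhile_idx ((t:Int) + 1 - d) _ hpi]
  rw [List.filter_append, List.filter_map]
  unfold skel
  rw [List.range_succ, List.filter_append, List.map_append]
  congr 1
  · congr 1
    rw [List.filter_filter]
    apply List.filter_congr
    intro j hj
    simp only [Function.comp, hP]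
    by_cases ha : (t:Int) + 1 - d ≤ (j:Int)
    · simp [ha, show (t:Int) - d ≤ (j:Int) by omega]
    · simp [ha]
  · simp only [List.filter_singleton, List.filter_cons, List.filter_nil]
    by_cases ha : (t:Int) + 1 - d ≤ (t:Int)
    · rw [if_pos (by simpa using ha)]
      rw [if_pos (by simp [ha, keepB_self])]
      rfl
    · rw [if_neg (by simpa using ha)]
      rw [if_neg (by simp [ha])]
      rfl

lemma skelMin_step (W : Nat → Int) (t : Nat) (d : Int) :
    ((popAbsMin (skelMin W t ((t:Int) - d)) (W t)) ++ [((t:Int), W t)]).dropWhile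
        (fun e => decide (e.1 < (t:Int) + 1 - d))
      = skelMin W (t+1) (((t:Int) + 1) - d) := by
  rw [skelMin_push]
  set P : Nat → Bool := fun (j : Nat) => decide ((t:Int) - d ≤ (j:Int)) && keepC W (t+1) j with hP
  have hpi : ((((List.range t).filter P).map (fun (j : Nat) => ((j:Int), W j))) ++ [((t:Int), W t)]).Pairwise
      (fun a b => a.1 < b.1) := by
    rw [List.pairwise_append]
    refine ⟨map_filter_pair_idx W t P, List.pairwise_singleton _ _, ?_⟩
    intro a ha b hb
    simp only [List.mem_map, List.mem_filter, List.mem_range] at ha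
    obtain ⟨j, ⟨hj, _⟩, rfl⟩ := ha
    simp only [List.mem_singleton] at hb
    subst hb
    simp only
    exact_mod_cast hj
  rw [dropWhile_idx ((t:Int) + 1 - d) _ hpi]
  rw [List.filter_append, List.filter_map]
  unfold skelMin
  rw [List.range_succ, List.filter_append, List.map_append]
  congr 1
  · congr 1
    rw [List.filter_filter]
    apply List.filter_congr
    intro j hj
    simp only [Function.comp, hP]
    by_cases ha : (t:Int) + 1 - d ≤ (j:Int)
    · simp [ha, show (t:Int) - d ≤ (j:Int) by omega]
    · simp [ha]
  · simp only [List.filter_singleton, List.filter_cons, List.filter_nil]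
    by_cases ha : (t:Int) + 1 - d ≤ (t:Int)
    · rw [if_pos (by simpa using ha)]
      rw [if_pos (by simp [ha, keepC_self])]
      rfl
    · rw [if_neg (by simpa using ha)]
      rw [if_neg (by simp [ha])]
      rfl

-- window emptiness
lemma skel_nil_iff (V : Nat → Int) (p : Nat) (d : Int) :
    skel V p ((p:Int) - d) = [] ↔ (p:Int) ≤ max ((p:Int) - d) 0 := by
  constructor
  · intro h
    by_contra hc
    push_neg at hc
    have hp1 : 1 ≤ p := by
      by_contra hp
      have : p = 0 := by omega
      subst this
      simp at hc
    have hmem : (p - 1) ∈ (List.range p).filter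
        (fun (j : Nat) => decide ((p:Int) - d ≤ (j:Int)) && keepB V p j) := by
      rw [List.mem_filter]
      refine ⟨by simp; omega, ?_⟩
      rw [Bool.and_eq_true]
      constructor
      · simp only [decide_eq_true_eq]
        have : max ((p:Int) - d) 0 ≤ (p:Int) - 1 := by omega
        have h2 : (p:Int) - d ≤ max ((p:Int) - d) 0 := le_max_left _ _
        push_cast
        omega
      · unfold keepB
        rw [List.all_eq_true]
        intro j' hj'
        simp only [List.mem_range] at hj'
        simp [show j' ≤ p - 1 by omega]
    unfold skel at h
    rw [List.map_eq_nil_iff] at h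
    rw [h] at hmem
    exact absurd hmem (List.not_mem_nil)
  · intro h
    unfold skel
    rw [List.map_eq_nil_iff, List.filter_eq_nil_iff]
    intro j hj
    simp only [List.mem_range] at hj
    have h0 : (0:Int) < (p:Int) := by
      have : (0:Nat) ≤ j := Nat.zero_le j
      omega
    have : max ((p:Int) - d) 0 = (p:Int) - d := by omega
    rw [Bool.and_eq_true]
    rintro ⟨h1, -⟩
    simp only [decide_eq_true_eq] at h1
    omega

lemma skelMin_nil_iff (W : Nat → Int) (p : Nat) (d : Int) :
    skelMin W p ((p:Int) - d) = [] ↔ (p:Int) ≤ max ((p:Int) - d) 0 := by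
  constructor
  · intro h
    by_contra hc
    push_neg at hc
    have hp1 : 1 ≤ p := by
      by_contra hp
      have : p = 0 := by omega
      subst this
      simp at hc
    have hmem : (p - 1) ∈ (List.range p).filter
        (fun (j : Nat) => decide ((p:Int) - d ≤ (j:Int)) && keepC W p j) := by
      rw [List.mem_filter]
      refine ⟨by simp; omega, ?_⟩
      rw [Bool.and_eq_true]
      constructor
      · simp only [decide_eq_true_eq]
        have : max ((p:Int) - d) 0 ≤ (p:Int) - 1 := by omega
        have h2 : (p:Int) - d ≤ max ((p:Int) - d) 0 := le_max_left _ _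
        push_cast
        omega
      · unfold keepC
        rw [List.all_eq_true]
        intro j' hj'
        simp only [List.mem_range] at hj'
        simp [show j' ≤ p - 1 by omega]
    unfold skelMin at h
    rw [List.map_eq_nil_iff] at h
    rw [h] at hmem
    exact absurd hmem (List.not_mem_nil)
  · intro h
    unfold skelMin
    rw [List.map_eq_nil_iff, List.filter_eq_nil_iff]
    intro j hj
    simp only [List.mem_range] at hj
    have h0 : (0:Int) < (p:Int) := by
      have : (0:Nat) ≤ j := Nat.zero_le j
      omega
    have : max ((p:Int) - d) 0 = (p:Int) - d := by omega
    rw [Bool.and_eq_true]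
    rintro ⟨h1, -⟩
    simp only [decide_eq_true_eq] at h1
    omega

-- gmax attains its value at a last argmax
lemma gmax_ge (V : Nat → Int) (lo m : Nat) :
    ∀ j, lo ≤ j → j ≤ lo + m → V j ≤ gmax V lo m := by
  induction m with
  | zero => intro j h1 h2; have : j = lo := by omega
            subst this; exact le_refl _
  | succ s ih =>
      intro j h1 h2
      by_cases hj : j = lo + s + 1
      · subst hj; exact le_max_right _ _
      · exact le_trans (ih j h1 (by omega)) (le_max_left _ _)

lemma gmin_le (W : Nat → Int) (lo m : Nat) :
    ∀ j, lo ≤ j → j ≤ lo + m → gmin W lo m ≤ W j := by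
  induction m with
  | zero => intro j h1 h2; have : j = lo := by omega
            subst this; exact le_refl _
  | succ s ih =>
      intro j h1 h2
      by_cases hj : j = lo + s + 1
      · subst hj; exact min_le_right _ _
      · exact le_trans (min_le_left _ _) (ih j h1 (by omega))

lemma gmax_argmax_last (V : Nat → Int) (lo m : Nat) :
    ∃ j, lo ≤ j ∧ j ≤ lo + m ∧ V j = gmax V lo m ∧
      ∀ j', j < j' → j' ≤ lo + m → V j' < V j := by
  induction m with
  | zero => exact ⟨lo, le_refl lo, by omega, rfl, fun j' h1 h2 => by omega⟩
  | succ s ih =>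
      obtain ⟨j, h1, h2, h3, h4⟩ := ih
      by_cases hc : gmax V lo s ≤ V (lo + s + 1)
      · refine ⟨lo + s + 1, by omega, by omega, ?_, fun j' ha hb => by omega⟩
        simp only [gmax]
        omega
      · refine ⟨j, h1, by omega, ?_, ?_⟩
        · simp only [gmax]
          omega
        · intro j' ha hb
          by_cases hj' : j' = lo + s + 1
          · subst hj'; omega
          · exact h4 j' ha (by omega)

lemma gmin_argmin_last (W : Nat → Int) (lo m : Nat) :
    ∃ j, lo ≤ j ∧ j ≤ lo + m ∧ W j = gmin W lo m ∧
      ∀ j', j < j' → j' ≤ lo + m → W j < W j' := by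
  induction m with
  | zero => exact ⟨lo, le_refl lo, by omega, rfl, fun j' h1 h2 => by omega⟩
  | succ s ih =>
      obtain ⟨j, h1, h2, h3, h4⟩ := ih
      by_cases hc : W (lo + s + 1) ≤ gmin W lo s
      · refine ⟨lo + s + 1, by omega, by omega, ?_, fun j' ha hb => by omega⟩
        simp only [gmin]
        omega
      · refine ⟨j, h1, by omega, ?_, ?_⟩
        · simp only [gmin]
          omega
        · intro j' ha hb
          by_cases hj' : j' = lo + s + 1
          · subst hj'; omega
          · exact h4 j' ha (by omega)

-- the deque front is the window maximum
lemma skel_head (V : Nat → Int) (p lo m : Nat) (d : Int)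
    (hlo : lo = (max ((p:Int) - d) 0).toNat) (hm : p = lo + m + 1) :
    ((skel V p ((p:Int) - d)).headD (0,0)).2 = gmax V lo m := by
  have hlo' : ((lo:Nat):Int) = max ((p:Int) - d) 0 := by
    rw [hlo]
    have : (0:Int) ≤ max ((p:Int) - d) 0 := le_max_right _ _
    omega
  have hne : skel V p ((p:Int) - d) ≠ [] := by
    rw [Ne, skel_nil_iff]
    omega
  obtain ⟨e, rest, hrest⟩ : ∃ e rest, skel V p ((p:Int) - d) = e :: rest := by
    cases h : skel V p ((p:Int) - d) with
    | nil => exact absurd h hne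
    | cons e rest => exact ⟨e, rest, rfl⟩
  have hehead : (skel V p ((p:Int) - d)).headD (0,0) = e := by rw [hrest]; rfl
  have hemem : e ∈ skel V p ((p:Int) - d) := by rw [hrest]; exact List.mem_cons_self
  obtain ⟨j0, hj0, hej0⟩ : ∃ j0, (j0 ∈ (List.range p).filter
      (fun (j : Nat) => decide ((p:Int) - d ≤ (j:Int)) && keepB V p j)) ∧ e = ((j0:Int), V j0) := by
    unfold skel at hemem
    rw [List.mem_map] at hemem
    obtain ⟨j0, h1, h2⟩ := hemem
    exact ⟨j0, h1, h2.symm⟩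
  rw [List.mem_filter, Bool.and_eq_true] at hj0
  have hj0r : j0 < p := by simpa using hj0.1
  have hj0thr : (p:Int) - d ≤ (j0:Int) := by
    have := hj0.2.1
    simpa using this
  have hj0lo : lo ≤ j0 := by omega
  -- upper bound: e.2 ≤ gmax
  have hup : V j0 ≤ gmax V lo m := gmax_ge V lo m j0 hj0lo (by omega)
  -- lower bound via the last argmax
  obtain ⟨jm, ha1, ha2, ha3, ha4⟩ := gmax_argmax_last V lo m
  have hjm_mem : ((jm:Int), V jm) ∈ skel V p ((p:Int) - d) := by
    unfold skel
    rw [List.mem_map]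
    refine ⟨jm, ?_, rfl⟩
    rw [List.mem_filter, Bool.and_eq_true]
    refine ⟨by simp; omega, ?_, ?_⟩
    · simp only [decide_eq_true_eq]
      omega
    · unfold keepB
      rw [List.all_eq_true]
      intro j' hj'
      simp only [List.mem_range] at hj'
      simp only [Bool.or_eq_true, decide_eq_true_eq]
      by_cases hle : j' ≤ jm
      · left; exact hle
      · right; exact ha4 j' (by omega) (by omega)
  have hlower : V jm ≤ e.2 := by
    rw [hrest] at hjm_mem
    rcases List.mem_cons.mp hjm_mem with heq | hmem
    · rw [← heq]
    · have hpv := skel_pair_val V p ((p:Int) - d)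
      rw [hrest, List.pairwise_cons] at hpv
      have := hpv.1 _ hmem
      simp only at this
      omega
  rw [hehead, hej0]
  simp only
  rw [hej0] at hlower
  simp only at hlower
  omega

lemma skelMin_head (W : Nat → Int) (p lo m : Nat) (d : Int)
    (hlo : lo = (max ((p:Int) - d) 0).toNat) (hm : p = lo + m + 1) :
    ((skelMin W p ((p:Int) - d)).headD (0,0)).2 = gmin W lo m := by
  have hlo' : ((lo:Nat):Int) = max ((p:Int) - d) 0 := by
    rw [hlo]
    have : (0:Int) ≤ max ((p:Int) - d) 0 := le_max_right _ _
    omega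
  have hne : skelMin W p ((p:Int) - d) ≠ [] := by
    rw [Ne, skelMin_nil_iff]
    omega
  obtain ⟨e, rest, hrest⟩ : ∃ e rest, skelMin W p ((p:Int) - d) = e :: rest := by
    cases h : skelMin W p ((p:Int) - d) with
    | nil => exact absurd h hne
    | cons e rest => exact ⟨e, rest, rfl⟩
  have hehead : (skelMin W p ((p:Int) - d)).headD (0,0) = e := by rw [hrest]; rfl
  have hemem : e ∈ skelMin W p ((p:Int) - d) := by rw [hrest]; exact List.mem_cons_self
  obtain ⟨j0, hj0, hej0⟩ : ∃ j0, (j0 ∈ (List.range p).filter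
      (fun (j : Nat) => decide ((p:Int) - d ≤ (j:Int)) && keepC W p j)) ∧ e = ((j0:Int), W j0) := by
    unfold skelMin at hemem
    rw [List.mem_map] at hemem
    obtain ⟨j0, h1, h2⟩ := hemem
    exact ⟨j0, h1, h2.symm⟩
  rw [List.mem_filter, Bool.and_eq_true] at hj0
  have hj0r : j0 < p := by simpa using hj0.1
  have hj0thr : (p:Int) - d ≤ (j0:Int) := by
    have := hj0.2.1
    simpa using this
  have hj0lo : lo ≤ j0 := by omega
  have hup : gmin W lo m ≤ W j0 := gmin_le W lo m j0 hj0lo (by omega)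
  obtain ⟨jm, ha1, ha2, ha3, ha4⟩ := gmin_argmin_last W lo m
  have hjm_mem : ((jm:Int), W jm) ∈ skelMin W p ((p:Int) - d) := by
    unfold skelMin
    rw [List.mem_map]
    refine ⟨jm, ?_, rfl⟩
    rw [List.mem_filter, Bool.and_eq_true]
    refine ⟨by simp; omega, ?_, ?_⟩
    · simp only [decide_eq_true_eq]
      omega
    · unfold keepC
      rw [List.all_eq_true]
      intro j' hj'
      simp only [List.mem_range] at hj'
      simp only [Bool.or_eq_true, decide_eq_true_eq]
      by_cases hle : j' ≤ jm
      · left; exact hle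
      · right; exact ha4 j' (by omega) (by omega)
  have hlower : e.2 ≤ W jm := by
    rw [hrest] at hjm_mem
    rcases List.mem_cons.mp hjm_mem with heq | hmem
    · rw [← heq]
    · have hpv := skelMin_pair_val W p ((p:Int) - d)
      rw [hrest, List.pairwise_cons] at hpv
      have := hpv.1 _ hmem
      simp only at this
      omega
  rw [hehead, hej0]
  simp only
  rw [hej0] at hlower
  simp only at hlower
  omega

-- ---- bcell at a nonempty window, in gmax/gmin form ----

lemma bcell_nonempty_eq (H L arr : List Int) (d : Int) (i lo m : Nat)
    (hL : L.length = H.length) (hn : H.length = arr.length)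
    (hlo : lo = (max ((i:Int) - d) 0).toNat) (hm : i = lo + m + 1) (hi : i ≤ H.length) :
    bcell arr d (H, L) i =
      (if 0 ≤ arr.getD i 0
       then (max 0 (arr.getD i 0 * gmax (Vmax H L) lo m),
             min 0 (arr.getD i 0 * gmin (Wmin H L) lo m))
       else (max 0 (arr.getD i 0 * gmin (Wmin H L) lo m),
             min 0 (arr.getD i 0 * gmax (Vmax H L) lo m))) := by
  have hw0 : (0:Int) ≤ max ((i:Int)-d) 0 := le_max_right _ _
  have hlo' : ((lo:Nat):Int) = max ((i:Int) - d) 0 := by omega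
  have hle : ¬ (i:Int) ≤ max ((i:Int)-d) 0 := by omega
  have hslice : PySem.List.slice (List.zipWith max H L) (some (max ((i:Int)-d) 0)) (some (i:Int))
      = (List.range' lo (m+1)).map (fun j => (List.zipWith max H L).getD j 0) := by
    rw [PySem.List.slice_toNat _ hw0 (by positivity)]
    rw [show (max ((i:Int)-d) 0).toNat = lo from hlo.symm,
      show ((i:Int)).toNat - lo = m + 1 from by omega]
    exact slice_eq_map_range' _ lo (m+1) (by simp [hL]; omega)
  have hslice' : PySem.List.slice (List.zipWith min H L) (some (max ((i:Int)-d) 0)) (some (i:Int))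
      = (List.range' lo (m+1)).map (fun j => (List.zipWith min H L).getD j 0) := by
    rw [PySem.List.slice_toNat _ hw0 (by positivity)]
    rw [show (max ((i:Int)-d) 0).toNat = lo from hlo.symm,
      show ((i:Int)).toNat - lo = m + 1 from by omega]
    exact slice_eq_map_range' _ lo (m+1) (by simp [hL]; omega)
  have hwmax : (PySem.List.max? (PySem.List.slice (List.zipWith max H L) (some (max ((i:Int)-d) 0)) (some (i:Int))) (fun y => y)).getD 0
      = gmax (fun j => (List.zipWith max H L).getD j 0) lo m := by
    rw [hslice, List.range'_succ, List.map_cons, PySem.List.max?_id_cons, Option.getD_some,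
      List.foldl_map, foldl_max_range']
  have hwmin : (PySem.List.min? (PySem.List.slice (List.zipWith min H L) (some (max ((i:Int)-d) 0)) (some (i:Int))) (fun y => y)).getD 0
      = gmin (fun j => (List.zipWith min H L).getD j 0) lo m := by
    rw [hslice', List.range'_succ, List.map_cons, PySem.List.min?_id_cons, Option.getD_some,
      List.foldl_map, foldl_min_range']
  have hgmax : gmax (fun j => (List.zipWith max H L).getD j 0) lo m = gmax (Vmax H L) lo m := by
    apply gmax_congr
    intro j h1 h2
    rw [zipWith_max_getD H L hL j (by omega)]
    rfl
  have hgmin : gmin (fun j => (List.zipWith min H L).getD j 0) lo m = gmin (Wmin H L) lo m := by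
    apply gmin_congr
    intro j h1 h2
    rw [zipWith_min_getD H L hL j (by omega)]
    rfl
  simp only [bcell, PySem.List.pyGetD_natCast, if_neg hle]
  rw [hwmax, hwmin, hgmax, hgmin]

-- ---- the layer invariant ----

def X1 (arr : List Int) (d : Int) (H L : List Int) : List Int :=
  (List.range arr.length).map (fun i => (bcell arr d (H, L) i).1)

def X2 (arr : List Int) (d : Int) (H L : List Int) : List Int :=
  (List.range arr.length).map (fun i => (bcell arr d (H, L) i).2)

def LInv (arr : List Int) (d : Int) (H L : List Int) (p : Nat)
    (st : List Int × List Int × List (Int × Int) × Nat × List (Int × Int) × Nat) : Prop :=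
  st.1 = (X1 arr d H L).take p ++ List.replicate (arr.length - p) 0 ∧
  st.2.1 = (X2 arr d H L).take p ++ List.replicate (arr.length - p) 0 ∧
  st.2.2.2.1 ≤ st.2.2.1.length ∧
  st.2.2.1.drop st.2.2.2.1 = skel (Vmax H L) (p - 1) (((p - 1 : Nat) : Int) - d) ∧
  st.2.2.2.2.2 ≤ st.2.2.2.2.1.length ∧
  st.2.2.2.2.1.drop st.2.2.2.2.2 = skelMin (Wmin H L) (p - 1) (((p - 1 : Nat) : Int) - d)

lemma length_X1 (arr : List Int) (d : Int) (H L : List Int) :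
    (X1 arr d H L).length = arr.length := by simp [X1]

lemma length_X2 (arr : List Int) (d : Int) (H L : List Int) :
    (X2 arr d H L).length = arr.length := by simp [X2]

lemma getD_X1 (arr : List Int) (d : Int) (H L : List Int) (i : Nat) (hi : i < arr.length) :
    (X1 arr d H L).getD i 0 = (bcell arr d (H, L) i).1 := by
  rw [List.getD_eq_getElem _ _ (by simp [X1]; exact hi)]
  simp [X1]

lemma getD_X2 (arr : List Int) (d : Int) (H L : List Int) (i : Nat) (hi : i < arr.length) :
    (X2 arr d H L).getD i 0 = (bcell arr d (H, L) i).2 := by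
  rw [List.getD_eq_getElem _ _ (by simp [X2]; exact hi)]
  simp [X2]

lemma bcell_empty (arr : List Int) (d : Int) (H L : List Int) (i : Nat)
    (h : (i:Int) ≤ max ((i:Int) - d) 0) :
    bcell arr d (H, L) i = (0, 0) := by
  simp [bcell, h]

lemma evictFront_stay (q : List (Int × Int)) (f : Nat) (t : Int) (hf : ¬ f < q.length) :
    evictFront q f t = f := by
  rw [evictFront.eq_def, dif_neg (by tauto)]

lemma inv_step (arr : List Int) (d : Int) (H L : List Int)
    (hH : H.length = arr.length) (hL : L.length = arr.length)
    (p : Nat) (hp : p < arr.length) (st : List Int × List Int × List (Int × Int) × Nat × List (Int × Int) × Nat)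
    (h : LInv arr d H L p st) :
    LInv arr d H L (p+1) (altStep arr d H L st p) := by
  obtain ⟨h1, h2, h3, h4, h5, h6⟩ := h
  by_cases hp0 : 0 < p
  · -- p = t + 1: push index t, evict, query the fronts
    obtain ⟨t, rfl⟩ : ∃ t, p = t + 1 := ⟨p - 1, by omega⟩
    simp only [Nat.add_sub_cancel] at h4 h6
    have hth : ((t + 1 : Nat) : Int) - d = (t : Int) + 1 - d := by push_cast; ring
    have hdx : (st.2.2.1.take st.2.2.2.1).length = st.2.2.2.1 := by
      rw [List.length_take]; omega
    have hdn : (st.2.2.2.2.1.take st.2.2.2.2.2).length = st.2.2.2.2.2 := by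
      rw [List.length_take]; omega
    have hv : max (H.getD (t + 1 - 1) 0) (L.getD (t + 1 - 1) 0) = Vmax H L t := by
      simp [Vmax]
    have hw : min (H.getD (t + 1 - 1) 0) (L.getD (t + 1 - 1) 0) = Wmin H L t := by
      simp [Wmin]
    have hcastidx : ((t + 1 : Nat) : Int) - 1 = ((t : Nat) : Int) := by push_cast; ring
    have hqx : popMaxBack st.2.2.1 st.2.2.2.1 (Vmax H L t) ++ [(((t + 1 : Nat) : Int) - 1, Vmax H L t)]
        = st.2.2.1.take st.2.2.2.1
            ++ (popAbs (skel (Vmax H L) t ((t : Int) - d)) (Vmax H L t) ++ [(((t : Nat) : Int), Vmax H L t)]) := by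
      conv_lhs => rw [show st.2.2.1 = st.2.2.1.take st.2.2.2.1 ++ st.2.2.1.drop st.2.2.2.1 from
        (List.take_append_drop _ _).symm]
      rw [show popMaxBack (st.2.2.1.take st.2.2.2.1 ++ st.2.2.1.drop st.2.2.2.1) st.2.2.2.1 (Vmax H L t)
            = popMaxBack (st.2.2.1.take st.2.2.2.1 ++ st.2.2.1.drop st.2.2.2.1)
                (st.2.2.1.take st.2.2.2.1).length (Vmax H L t) from by rw [hdx]]
      rw [popMaxBack_append, h4, hcastidx, List.append_assoc]
    have hqn : popMinBack st.2.2.2.2.1 st.2.2.2.2.2 (Wmin H L t) ++ [(((t + 1 : Nat) : Int) - 1, Wmin H L t)]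
        = st.2.2.2.2.1.take st.2.2.2.2.2
            ++ (popAbsMin (skelMin (Wmin H L) t ((t : Int) - d)) (Wmin H L t) ++ [(((t : Nat) : Int), Wmin H L t)]) := by
      conv_lhs => rw [show st.2.2.2.2.1 = st.2.2.2.2.1.take st.2.2.2.2.2 ++ st.2.2.2.2.1.drop st.2.2.2.2.2 from
        (List.take_append_drop _ _).symm]
      rw [show popMinBack (st.2.2.2.2.1.take st.2.2.2.2.2 ++ st.2.2.2.2.1.drop st.2.2.2.2.2) st.2.2.2.2.2 (Wmin H L t)
            = popMinBack (st.2.2.2.2.1.take st.2.2.2.2.2 ++ st.2.2.2.2.1.drop st.2.2.2.2.2)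
                (st.2.2.2.2.1.take st.2.2.2.2.2).length (Wmin H L t) from by rw [hdn]]
      rw [popMinBack_append, h6, hcastidx, List.append_assoc]
    set PX := popAbs (skel (Vmax H L) t ((t : Int) - d)) (Vmax H L t) ++ [(((t : Nat) : Int), Vmax H L t)] with hPX
    set PN := popAbsMin (skelMin (Wmin H L) t ((t : Int) - d)) (Wmin H L t) ++ [(((t : Nat) : Int), Wmin H L t)] with hPN
    set QX := st.2.2.1.take st.2.2.2.1 ++ PX with hQX
    set QN := st.2.2.2.2.1.take st.2.2.2.2.2 ++ PN with hQN
    have hfxle : st.2.2.2.1 ≤ QX.length := by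
      rw [hQX, List.length_append, hdx]; omega
    have hfnle : st.2.2.2.2.2 ≤ QN.length := by
      rw [hQN, List.length_append, hdn]; omega
    obtain ⟨he1, he2, he3⟩ := evictFront_spec QX (((t + 1 : Nat) : Int) - d)
      (QX.length - st.2.2.2.1) st.2.2.2.1 (le_refl _) hfxle
    obtain ⟨hf1, hf2, hf3⟩ := evictFront_spec QN (((t + 1 : Nat) : Int) - d)
      (QN.length - st.2.2.2.2.2) st.2.2.2.2.2 (le_refl _) hfnle
    have hdropX : QX.drop st.2.2.2.1 = PX := by
      rw [hQX, show QX.drop st.2.2.2.1 = (st.2.2.1.take st.2.2.2.1 ++ PX).drop (st.2.2.1.take st.2.2.2.1).length from by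
        rw [hdx], List.drop_left]
    have hdropN : QN.drop st.2.2.2.2.2 = PN := by
      rw [hQN, show QN.drop st.2.2.2.2.2 = (st.2.2.2.2.1.take st.2.2.2.2.2 ++ PN).drop (st.2.2.2.2.1.take st.2.2.2.2.2).length from by
        rw [hdn], List.drop_left]
    have hskX : QX.drop (evictFront QX st.2.2.2.1 (((t + 1 : Nat) : Int) - d))
        = skel (Vmax H L) (t + 1) (((t + 1 : Nat) : Int) - d) := by
      rw [he3, hdropX, hPX, hth, skel_step, ← hth]
    have hskN : QN.drop (evictFront QN st.2.2.2.2.2 (((t + 1 : Nat) : Int) - d))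
        = skelMin (Wmin H L) (t + 1) (((t + 1 : Nat) : Int) - d) := by
      rw [hf3, hdropN, hPN, hth, skelMin_step, ← hth]
    set fx' := evictFront QX st.2.2.2.1 (((t + 1 : Nat) : Int) - d) with hfx'
    set fn' := evictFront QN st.2.2.2.2.2 (((t + 1 : Nat) : Int) - d) with hfn'
    simp only [altStep, if_pos (by omega : 0 < t + 1), hv, hw, hqx, hqn, ← hQX, ← hQN,
      ← hfx', ← hfn']
    by_cases hne : fx' < QX.length
    · rw [if_pos hne]
      have hSKne : skel (Vmax H L) (t + 1) (((t + 1 : Nat) : Int) - d) ≠ [] := by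
        rw [← hskX]
        intro hcon
        rw [List.drop_eq_nil_iff] at hcon
        omega
      have hwin : ¬ ((t + 1 : Nat) : Int) ≤ max (((t + 1 : Nat) : Int) - d) 0 := by
        intro hcon
        exact hSKne ((skel_nil_iff (Vmax H L) (t + 1) d).mpr hcon)
      have hSKNne : skelMin (Wmin H L) (t + 1) (((t + 1 : Nat) : Int) - d) ≠ [] := by
        intro hcon
        rw [skelMin_nil_iff] at hcon
        exact hwin hcon
      have hfnlt : fn' < QN.length := by
        by_contra hcon
        have hnil : QN.drop fn' = [] := List.drop_eq_nil_of_le (by omega)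
        rw [hskN] at hnil
        exact hSKNne hnil
      set lo : Nat := (max (((t + 1 : Nat) : Int) - d) 0).toNat with hlo
      have hlolt : lo < t + 1 := by
        have hma : (0:Int) ≤ max (((t + 1 : Nat) : Int) - d) 0 := le_max_right _ _
        omega
      set m : Nat := t - lo with hm
      have hpm : t + 1 = lo + m + 1 := by omega
      have hgx : (QX.getD fx' (0, 0)).2 = gmax (Vmax H L) lo m := by
        rw [getD_eq_headD_drop QX fx' hne, hskX, skel_head (Vmax H L) (t + 1) lo m d hlo hpm]
      have hgn : (QN.getD fn' (0, 0)).2 = gmin (Wmin H L) lo m := by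
        rw [getD_eq_headD_drop QN fn' hfnlt, hskN, skelMin_head (Wmin H L) (t + 1) lo m d hlo hpm]
      have hbc : bcell arr d (H, L) (t + 1) =
          (if 0 ≤ arr.getD (t + 1) 0
           then (max 0 (arr.getD (t + 1) 0 * gmax (Vmax H L) lo m),
                 min 0 (arr.getD (t + 1) 0 * gmin (Wmin H L) lo m))
           else (max 0 (arr.getD (t + 1) 0 * gmin (Wmin H L) lo m),
                 min 0 (arr.getD (t + 1) 0 * gmax (Vmax H L) lo m))) :=
        bcell_nonempty_eq H L arr d (t + 1) lo m (by rw [hL, hH]) hH hlo hpm (by rw [hH]; omega)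
      rw [hgx, hgn]
      by_cases ha : 0 ≤ arr.getD (t + 1) 0
      · rw [if_pos ha]
        have hX : (X1 arr d H L).getD (t + 1) 0
            = max 0 (arr.getD (t + 1) 0 * gmax (Vmax H L) lo m) := by
          rw [getD_X1 arr d H L (t + 1) (by omega), hbc, if_pos ha]
        have hX2 : (X2 arr d H L).getD (t + 1) 0
            = min 0 (arr.getD (t + 1) 0 * gmin (Wmin H L) lo m) := by
          rw [getD_X2 arr d H L (t + 1) (by omega), hbc, if_pos ha]
        refine ⟨?_, ?_, he2, ?_, hf2, ?_⟩
        · rw [h1, ← hX]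
          exact partial_set _ _ _ (length_X1 arr d H L) (by omega)
        · rw [h2, ← hX2]
          exact partial_set _ _ _ (length_X2 arr d H L) (by omega)
        · simp only [Nat.add_sub_cancel]
          exact hskX
        · simp only [Nat.add_sub_cancel]
          exact hskN
      · rw [if_neg ha]
        have hX : (X1 arr d H L).getD (t + 1) 0
            = max 0 (arr.getD (t + 1) 0 * gmin (Wmin H L) lo m) := by
          rw [getD_X1 arr d H L (t + 1) (by omega), hbc, if_neg ha]
        have hX2 : (X2 arr d H L).getD (t + 1) 0
            = min 0 (arr.getD (t + 1) 0 * gmax (Vmax H L) lo m) := by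
          rw [getD_X2 arr d H L (t + 1) (by omega), hbc, if_neg ha]
        refine ⟨?_, ?_, he2, ?_, hf2, ?_⟩
        · rw [h1, ← hX]
          exact partial_set _ _ _ (length_X1 arr d H L) (by omega)
        · rw [h2, ← hX2]
          exact partial_set _ _ _ (length_X2 arr d H L) (by omega)
        · simp only [Nat.add_sub_cancel]
          exact hskX
        · simp only [Nat.add_sub_cancel]
          exact hskN
    · rw [if_neg hne]
      have hSKnil : skel (Vmax H L) (t + 1) (((t + 1 : Nat) : Int) - d) = [] := by
        rw [← hskX]
        exact List.drop_eq_nil_of_le (by omega)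
      have hwin : ((t + 1 : Nat) : Int) ≤ max (((t + 1 : Nat) : Int) - d) 0 :=
        (skel_nil_iff (Vmax H L) (t + 1) d).mp hSKnil
      have hSKNnil : skelMin (Wmin H L) (t + 1) (((t + 1 : Nat) : Int) - d) = [] :=
        (skelMin_nil_iff (Wmin H L) (t + 1) d).mpr hwin
      have hcell : bcell arr d (H, L) (t + 1) = (0, 0) := bcell_empty arr d H L (t + 1) hwin
      refine ⟨?_, ?_, he2, ?_, hf2, ?_⟩
      · rw [h1]
        exact partial_skip _ _ _ (length_X1 arr d H L) (by omega)
          (by rw [getD_X1 arr d H L (t + 1) (by omega), hcell])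
      · rw [h2]
        exact partial_skip _ _ _ (length_X2 arr d H L) (by omega)
          (by rw [getD_X2 arr d H L (t + 1) (by omega), hcell])
      · simp only [Nat.add_sub_cancel]
        exact hskX
      · simp only [Nat.add_sub_cancel]
        exact hskN
  · -- p = 0: nothing pushed, the deques stay empty, the cell is 0
    have hp' : p = 0 := by omega
    subst hp'
    have hq4 : st.2.2.1.drop st.2.2.2.1 = [] := by
      rw [h4]; simp [skel]
    have hq6 : st.2.2.2.2.1.drop st.2.2.2.2.2 = [] := by
      rw [h6]; simp [skelMin]
    have hfx : ¬ st.2.2.2.1 < st.2.2.1.length := by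
      rw [List.drop_eq_nil_iff] at hq4; omega
    have hfn : ¬ st.2.2.2.2.2 < st.2.2.2.2.1.length := by
      rw [List.drop_eq_nil_iff] at hq6; omega
    have he1 : evictFront st.2.2.1 st.2.2.2.1 (((0 : Nat) : Int) - d) = st.2.2.2.1 :=
      evictFront_stay _ _ _ hfx
    have hf1 : evictFront st.2.2.2.2.1 st.2.2.2.2.2 (((0 : Nat) : Int) - d) = st.2.2.2.2.2 :=
      evictFront_stay _ _ _ hfn
    have hcell : bcell arr d (H, L) 0 = (0, 0) :=
      bcell_empty arr d H L 0 (by simp)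
    simp only [altStep, if_neg (by omega : ¬ 0 < 0), he1, hf1]
    rw [if_neg hfx]
    refine ⟨?_, ?_, h3, ?_, h5, ?_⟩
    · rw [h1]
      exact partial_skip _ _ _ (length_X1 arr d H L) (by omega)
        (by rw [getD_X1 arr d H L 0 (by omega), hcell])
    · rw [h2]
      exact partial_skip _ _ _ (length_X2 arr d H L) (by omega)
        (by rw [getD_X2 arr d H L 0 (by omega), hcell])
    · rw [hq4]; simp [skel]
    · rw [hq6]; simp [skelMin]


lemma inv_fold (arr : List Int) (d : Int) (H L : List Int)
    (hH : H.length = arr.length) (hL : L.length = arr.length) :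
    ∀ p, p ≤ arr.length →
      LInv arr d H L p ((List.range p).foldl (altStep arr d H L)
        (List.replicate arr.length 0, List.replicate arr.length 0,
         ([] : List (Int × Int)), 0, ([] : List (Int × Int)), 0)) := by
  intro p
  induction p with
  | zero =>
      intro _
      refine ⟨by simp [LInv], by simp, by simp, ?_, by simp, ?_⟩
      · simp [skel]
      · simp [skelMin]
  | succ q ih =>
      intro hq
      rw [List.range_succ, List.foldl_append]
      simp only [List.foldl_cons, List.foldl_nil]
      exact inv_step arr d H L hH hL q (by omega) _ (ih (by omega))

lemma altLayer_eq (arr : List Int) (d : Int) (H L : List Int)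
    (hH : H.length = arr.length) (hL : L.length = arr.length) :
    altLayer arr d (H, L) = (X1 arr d H L, X2 arr d H L) := by
  have h := inv_fold arr d H L hH hL arr.length (le_refl _)
  obtain ⟨h1, h2, -, -, -, -⟩ := h
  unfold altLayer
  simp only
  rw [h1, h2]
  rw [List.take_of_length_le (by rw [length_X1]), List.take_of_length_le (by rw [length_X2])]
  simp

lemma foldl_altLayer_eq_FB (arr : List Int) (d : Int) (m : Nat) :
    (List.range m).foldl (fun st _ => altLayer arr d st) (arr, arr) = FB arr d m := by
  induction m with
  | zero => rfl
  | succ s ih =>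
      rw [List.range_succ, List.foldl_append, ih]
      simp only [List.foldl_cons, List.foldl_nil]
      have hpair : FB arr d s = ((FB arr d s).1, (FB arr d s).2) := rfl
      rw [hpair, altLayer_eq arr d _ _ (length_FB1 arr d s) (length_FB2 arr d s)]
      cases s <;> rfl

lemma foo_alt_eq (arr : List Int) (k : Int) (d : Int) (hk : 1 ≤ k) (ha : arr ≠ []) :
    foo_alt arr k d = (FB arr d (k.toNat - 1)).1.getD (arr.length - 1) 0 := by
  rw [foo_alt]
  have hm : (k - 1).toNat = k.toNat - 1 := by omega
  rw [hm, foldl_altLayer_eq_FB]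
  have hne : (FB arr d (k.toNat - 1)).1 ≠ [] := by
    have := length_FB1 arr d (k.toNat - 1)
    intro hcon
    rw [hcon] at this
    simp at this
    exact ha (List.eq_nil_of_length_eq_zero this.symm)
  have hlen : 0 < arr.length := List.length_pos_of_ne_nil ha
  rw [PySem.List.pyGetD_neg_one _ _ hne, List.getLast_eq_getElem hne]
  rw [List.getD_eq_getElem _ _ (by rw [length_FB1]; omega)]
  congr 1
  rw [length_FB1]

-- ===== VERDICT (by name: the statement is the Claim_ definition above) =====
theorem foo_spec : Claim_equal_foo := by
  intro arr k d _ hpre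
  unfold Spec_foo
  rw [foo_eq arr k d hpre.1 hpre.2, foo_alt_eq arr k d hpre.1 hpre.2]
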